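-- pv_equiv track=rewrite | github.com/PhamMinhHiepIT2/LeetCodePractice | non_decrease.py | totalStepsBFS
-- ===== SOURCE A (Python) =====
-- from typing import List
--
-- def totalStepsBFS(nums: List[int]) -> int:
--     n = len(nums)
--     l = [i-1 for i in range(n)]
--     r = [i+1 for i in range(n)]
--     q = []
--     dist = dict()
--     ans = 0
--     for i in range(1, n):
--         if nums[i] < nums[i-1]:
--             q.append(i)
--             dist[i] = 1
--             ans = 1
--     while len(q) != 0:
--         u = q.pop(0)
--         ans = max(ans, dist[u])
--         if r[u] < n:
--             l[r[u]] = l[u]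
--         if l[u] > -1:
--             r[l[u]] = r[u]
--         if r[u] not in dist and r[u] < n and nums[r[u]] < nums[l[u]]:
--             dist[r[u]] = dist[u] + 1
--             q.append(r[u])
--     return ans
-- ===== SOURCE B (Python) =====
-- from typing import List
--
-- def totalStepsBFS(nums: List[int]) -> int:
--     # Round simulation: repeatedly delete every element smaller than its
--     # predecessor, all at once; the answer is the number of rounds needed.
--     steps = 0
--     cur = nums
--     while True:
--         nxt = cur[:1] + [cur[i] for i in range(1, len(cur)) if cur[i] >= cur[i-1]]
--         if len(nxt) == len(cur):
--             return steps
--         steps += 1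
--         cur = nxt
-- ===== Notes on version B (the rewrite author's own statement) =====
-- stated objective: simpler
-- what changed: A's doubly-linked-list + BFS-queue + distance-dict simulation is replaced by a direct round simulation: repeatedly rebuild the list keeping only elements not smaller than their predecessor and count the rounds until a fixpoint.
import Mathlib
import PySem

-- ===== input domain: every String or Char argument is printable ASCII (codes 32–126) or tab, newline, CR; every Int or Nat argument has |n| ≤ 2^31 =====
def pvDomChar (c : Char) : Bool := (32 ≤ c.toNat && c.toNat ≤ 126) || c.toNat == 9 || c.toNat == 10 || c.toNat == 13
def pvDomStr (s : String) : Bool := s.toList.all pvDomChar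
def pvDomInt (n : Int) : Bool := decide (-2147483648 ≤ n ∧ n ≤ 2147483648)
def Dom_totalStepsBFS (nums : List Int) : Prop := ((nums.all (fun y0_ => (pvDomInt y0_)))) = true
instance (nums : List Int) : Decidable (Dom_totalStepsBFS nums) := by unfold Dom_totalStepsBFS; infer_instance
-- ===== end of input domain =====

-- B replaces A's linked-list + BFS-queue + distance-dict machinery by a direct
-- round simulation (delete all elements smaller than their predecessor, count
-- rounds to a fixpoint): a simpler, structurally different exact algorithm.


-- ===== PORT A =====
-- The while-loop of A, as fuel recursion.  The fuel `nums.length + 1` passed by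
-- `totalStepsBFS` is never exhausted: each iteration pops one queue element and
-- every enqueue inserts a fresh key (an index in [1, len nums)) into dist, so
-- there are at most `nums.length - 1` iterations.  The loop body transliterates
-- Python statement by statement, re-reading l/r after each mutation as Python does.
def loopA (nums : List Int) : Nat → List Int → List Int → List Int → PySem.Dict Int Int → Int → Int
  | _, _l, _r, [], _dist, ans => ans
  | 0, _l, _r, _ :: _, _dist, ans => ans
  | fuel+1, l, r, u :: q, dist, ans =>
    let n : Int := (nums.length : Int)
    -- ans = max(ans, dist[u])   (dist[u]: the key is always present)
    let ans1 := max ans (dist.getD u 0)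
    -- if r[u] < n: l[r[u]] = l[u]
    let l1 := if PySem.List.pyGetD r u 0 < n then
        PySem.List.pySetD l (PySem.List.pyGetD r u 0) (PySem.List.pyGetD l u 0) else l
    -- if l[u] > -1: r[l[u]] = r[u]   (l re-read after the first mutation)
    let r1 := if PySem.List.pyGetD l1 u 0 > -1 then
        PySem.List.pySetD r (PySem.List.pyGetD l1 u 0) (PySem.List.pyGetD r u 0) else r
    -- if r[u] not in dist and r[u] < n and nums[r[u]] < nums[l[u]]
    if ¬ (dist.contains (PySem.List.pyGetD r1 u 0) = true) ∧ PySem.List.pyGetD r1 u 0 < n ∧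
        PySem.List.pyGetD nums (PySem.List.pyGetD r1 u 0) 0 <
          PySem.List.pyGetD nums (PySem.List.pyGetD l1 u 0) 0 then
      loopA nums fuel l1 r1 (q ++ [PySem.List.pyGetD r1 u 0])
        (dist.insert (PySem.List.pyGetD r1 u 0) (dist.getD u 0 + 1)) ans1
    else
      loopA nums fuel l1 r1 q dist ans1

-- for i in range(1, n): if nums[i] < nums[i-1]: q.append(i); dist[i] = 1; ans = 1
def initA (nums : List Int) : List Int × PySem.Dict Int Int × Int :=
  (PySem.List.pyRange 1 (nums.length : Int) 1).foldl
    (fun st i =>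
      if PySem.List.pyGetD nums i 0 < PySem.List.pyGetD nums (i - 1) 0 then
        (st.1 ++ [i], st.2.1.insert i 1, (1 : Int))
      else st)
    ([], PySem.Dict.empty, 0)

def totalStepsBFS (nums : List Int) : Int :=
  let n : Int := (nums.length : Int)
  let l := (PySem.List.pyRange 0 n 1).map (fun i => i - 1)
  let r := (PySem.List.pyRange 0 n 1).map (fun i => i + 1)
  let st := initA nums
  loopA nums (nums.length + 1) l r st.1 st.2.1 st.2.2

-- ===== PORT B =====
-- nxt = cur[:1] + [cur[i] for i in range(1, len(cur)) if cur[i] >= cur[i-1]]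
def bStep (cur : List Int) : List Int :=
  PySem.List.slice cur none (some 1) ++
    ((PySem.List.pyRange 1 (cur.length : Int) 1).filter
        (fun i => decide (PySem.List.pyGetD cur (i - 1) 0 ≤ PySem.List.pyGetD cur i 0))).map
      (fun i => PySem.List.pyGetD cur i 0)

-- termination of the while-loop of B: the rebuilt list never gets longer
theorem bStep_length_le (cur : List Int) : (bStep cur).length ≤ cur.length := by
  unfold bStep
  have h1 : (PySem.List.slice cur none (some 1)).length ≤ min 1 cur.length := by
    rw [PySem.List.slice_to cur (by norm_num : (0:Int) ≤ 1)]
    simp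
  have h2 : (((PySem.List.pyRange 1 (cur.length : Int) 1).filter
        (fun i => decide (PySem.List.pyGetD cur (i - 1) 0 ≤ PySem.List.pyGetD cur i 0))).map
      (fun i => PySem.List.pyGetD cur i 0)).length ≤ ((cur.length : Int) - 1).toNat := by
    rw [List.length_map]
    calc _ ≤ (PySem.List.pyRange 1 (cur.length : Int) 1).length := List.length_filter_le _ _
    _ = ((cur.length : Int) - 1).toNat := PySem.List.length_pyRange_one 1 _
  rw [List.length_append]
  omega

def bLoop (steps : Int) (cur : List Int) : Int :=
  let nxt := bStep cur
  if nxt.length = cur.length then steps else bLoop (steps + 1) nxt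
termination_by cur.length
decreasing_by
  have h1 := bStep_length_le cur
  rename_i h
  simp only [nxt] at h ⊢
  omega

def totalStepsBFS_alt (nums : List Int) : Int := bLoop 0 nums

-- ===== PRECONDITION & SPEC =====
def Spec_totalStepsBFS (nums : List Int) (out : Int) : Prop := out = totalStepsBFS_alt nums
instance (nums : List Int) (out : Int) : Decidable (Spec_totalStepsBFS nums out) := by unfold Spec_totalStepsBFS; infer_instance

-- ===== CLAIM (what is proved, stated in full; the proofs are below) =====
def Claim_equal_totalStepsBFS : Prop := ∀ (nums : List Int), Dom_totalStepsBFS nums → Spec_totalStepsBFS nums (totalStepsBFS nums)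

-- ===== LEMMAS AND PROOFS =====

-- ---------- spec-level machinery: the round process on index lists ----------

-- value at an index
def pvVal (nums : List Int) (x : Int) : Int := PySem.List.pyGetD nums x 0

-- one round, on index lists (prev index carried along)
def pvKeepGo (nums : List Int) (p : Int) : List Int → List Int
  | [] => []
  | x :: t => if pvVal nums x < pvVal nums p then pvKeepGo nums x t else x :: pvKeepGo nums x t

def pvRemGo (nums : List Int) (p : Int) : List Int → List Int
  | [] => []
  | x :: t => if pvVal nums x < pvVal nums p then x :: pvRemGo nums x t else pvRemGo nums x t

def pvStep (nums : List Int) : List Int → List Int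
  | [] => []
  | h :: t => h :: pvKeepGo nums h t

def pvRem (nums : List Int) : List Int → List Int
  | [] => []
  | h :: t => pvRemGo nums h t

-- one round, on value lists (mirrors B)
def pvKeepGoV (p : Int) : List Int → List Int
  | [] => []
  | x :: t => if x < p then pvKeepGoV x t else x :: pvKeepGoV x t

def pvRemGoV (p : Int) : List Int → List Int
  | [] => []
  | x :: t => if x < p then x :: pvRemGoV x t else pvRemGoV x t

def pvStepV : List Int → List Int
  | [] => []
  | h :: t => h :: pvKeepGoV h t

def pvRemV : List Int → List Int
  | [] => []
  | h :: t => pvRemGoV h t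

-- survivors after k rounds (index lists)
def pvSurv (nums : List Int) : Nat → List Int
  | 0 => PySem.List.pyRange 0 (nums.length : Int) 1
  | k+1 => pvStep nums (pvSurv nums k)

-- sorted index list with entries in [0, n)
def pvSN (n : Int) (s : List Int) : Prop :=
  s.Pairwise (· < ·) ∧ ∀ x ∈ s, 0 ≤ x ∧ x < n

-- predecessor / successor of v in the list s (max element < v, min element > v)
def pvPd (s : List Int) (v : Int) : Int := (s.filter (fun w => decide (w < v))).foldl max (-1)
def pvSc (n : Int) (s : List Int) (v : Int) : Int := (s.filter (fun w => decide (v < w))).foldl min n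

-- the pointer arrays realize the doubly-linked list over the unprocessed indices U
def pvLinks (n : Int) (l r U : List Int) : Prop :=
  ∀ v ∈ U, PySem.List.pyGetD l v 0 = pvPd U v ∧ PySem.List.pyGetD r v 0 = pvSc n U v

-- unprocessed indices, mid-round: survivors of the previous rounds minus `done`
def pvU (nums : List Int) (e : Nat) (done : List Int) : List Int :=
  (pvSurv nums e).filter (fun v => decide (v ∉ done))

-- next-round removals already discovered: those whose trigger (their
-- predecessor in the current survivor list) has been processed
def pvDisc (nums : List Int) (e : Nat) (done : List Int) : List Int :=
  (pvRem nums (pvSurv nums (e+1))).filter (fun x => decide (pvPd (pvSurv nums e) x ∈ done))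

theorem pvKeepGo_remGo_length (nums : List Int) (p : Int) (t : List Int) :
    (pvKeepGo nums p t).length + (pvRemGo nums p t).length = t.length := by
  induction t generalizing p with
  | nil => simp [pvKeepGo, pvRemGo]
  | cons x t ih =>
    simp only [pvKeepGo, pvRemGo]
    have := ih x
    by_cases h : pvVal nums x < pvVal nums p <;> simp [h] <;> omega

theorem pvStep_rem_length (nums : List Int) (s : List Int) :
    (pvStep nums s).length + (pvRem nums s).length = s.length := by
  cases s with
  | nil => simp [pvStep, pvRem]
  | cons h t =>
    have := pvKeepGo_remGo_length nums h t
    simp [pvStep, pvRem]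
    omega

theorem pvKeepGoV_remGoV_length (p : Int) (t : List Int) :
    (pvKeepGoV p t).length + (pvRemGoV p t).length = t.length := by
  induction t generalizing p with
  | nil => simp [pvKeepGoV, pvRemGoV]
  | cons x t ih =>
    simp only [pvKeepGoV, pvRemGoV]
    have := ih x
    by_cases h : x < p <;> simp [h] <;> omega

theorem pvStepV_remV_length (s : List Int) :
    (pvStepV s).length + (pvRemV s).length = s.length := by
  cases s with
  | nil => simp [pvStepV, pvRemV]
  | cons h t =>
    have := pvKeepGoV_remGoV_length h t
    simp [pvStepV, pvRemV]
    omega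

-- number of rounds to the fixpoint, on index lists
def pvRoundsI (nums : List Int) (s : List Int) : Nat :=
  if pvRem nums s = [] then 0 else 1 + pvRoundsI nums (pvStep nums s)
termination_by s.length
decreasing_by
  have h := pvStep_rem_length nums s
  rename_i hne
  have : (pvRem nums s).length ≠ 0 := by simpa using hne
  omega

-- number of rounds, on value lists
def pvRoundsV (s : List Int) : Nat :=
  if pvRemV s = [] then 0 else 1 + pvRoundsV (pvStepV s)
termination_by s.length
decreasing_by
  have h := pvStepV_remV_length s
  rename_i hne
  have : (pvRemV s).length ≠ 0 := by simpa using hne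
  omega

-- the fixpoint survivor list (used only for the fuel bound)
def pvFix (nums : List Int) (s : List Int) : List Int :=
  if pvRem nums s = [] then s else pvFix nums (pvStep nums s)
termination_by s.length
decreasing_by
  have h := pvStep_rem_length nums s
  rename_i hne
  have : (pvRem nums s).length ≠ 0 := by simpa using hne
  omega

-- ---------- basic facts ----------

theorem pvPd_spec (s : List Int) (v : Int) :
    (pvPd s v = -1 ∨ (pvPd s v ∈ s ∧ pvPd s v < v)) ∧
    (∀ w ∈ s, w < v → w ≤ pvPd s v) ∧ -1 ≤ pvPd s v := by
  unfold pvPd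
  have hm := PySem.List.foldl_max_mem (s.filter (fun w => decide (w < v))) (-1)
  have hle := PySem.List.le_foldl_max (s.filter (fun w => decide (w < v))) (-1)
  refine ⟨?_, ?_, hle.1⟩
  · rcases hm with h | h
    · exact Or.inl h
    · refine Or.inr ⟨List.mem_of_mem_filter h, ?_⟩
      have := List.of_mem_filter h
      simpa using this
  · intro w hw hwv
    exact hle.2 w (List.mem_filter.mpr ⟨hw, by simpa using hwv⟩)

theorem pvPd_unique (s : List Int) (v p : Int) (hp0 : -1 ≤ p) (hp : p ∈ s) (h1 : p < v)
    (hmax : ∀ w ∈ s, w < v → w ≤ p) : pvPd s v = p := by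
  obtain ⟨h1', h2', h3'⟩ := pvPd_spec s v
  have hge : p ≤ pvPd s v := h2' p hp h1
  rcases h1' with h | h
  · omega
  · have := hmax _ h.1 h.2
    omega

theorem pvPd_neg (s : List Int) (v : Int) (h : ∀ w ∈ s, ¬ w < v) : pvPd s v = -1 := by
  unfold pvPd
  have : s.filter (fun w => decide (w < v)) = [] := by
    rw [List.filter_eq_nil_iff]
    intro w hw
    simpa using h w hw
  rw [this]
  rfl

theorem pvSc_spec (n : Int) (s : List Int) (v : Int) :
    (pvSc n s v = n ∨ (pvSc n s v ∈ s ∧ v < pvSc n s v)) ∧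
    (∀ w ∈ s, v < w → pvSc n s v ≤ w) ∧ pvSc n s v ≤ n := by
  unfold pvSc
  have hm := PySem.List.foldl_min_mem (s.filter (fun w => decide (v < w))) n
  have hle := PySem.List.foldl_min_le (s.filter (fun w => decide (v < w))) n
  refine ⟨?_, ?_, hle.1⟩
  · rcases hm with h | h
    · exact Or.inl h
    · refine Or.inr ⟨List.mem_of_mem_filter h, ?_⟩
      have := List.of_mem_filter h
      simpa using this
  · intro w hw hwv
    exact hle.2 w (List.mem_filter.mpr ⟨hw, by simpa using hwv⟩)

theorem pvSc_unique (n : Int) (s : List Int) (v x : Int) (hx0 : x ≤ n) (hx : x ∈ s) (h1 : v < x)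
    (hmin : ∀ w ∈ s, v < w → x ≤ w) : pvSc n s v = x := by
  obtain ⟨h1', h2', h3'⟩ := pvSc_spec n s v
  have hge : pvSc n s v ≤ x := h2' x hx h1
  rcases h1' with h | h
  · omega
  · have := hmin _ h.1 h.2
    omega

theorem pvSc_top (n : Int) (s : List Int) (v : Int) (h : ∀ w ∈ s, ¬ v < w) : pvSc n s v = n := by
  unfold pvSc
  have : s.filter (fun w => decide (v < w)) = [] := by
    rw [List.filter_eq_nil_iff]
    intro w hw
    simpa using h w hw
  rw [this]
  rfl

-- pd over cons-lists
theorem pvPd_cons_head (p : Int) (t : List Int) (hs : (p :: t).Pairwise (· < ·)) :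
    pvPd (p :: t) p = -1 := by
  apply pvPd_neg
  intro w hw
  rcases List.mem_cons.mp hw with h | h
  · omega
  · have := (List.pairwise_cons.mp hs).1 w h
    omega

theorem pvPd_cons_second (p x : Int) (t : List Int) (hp0 : -1 ≤ p)
    (hs : (p :: x :: t).Pairwise (· < ·)) : pvPd (p :: x :: t) x = p := by
  have hpx : p < x := (List.pairwise_cons.mp hs).1 x (by simp)
  apply pvPd_unique _ _ _ hp0 (by simp) hpx
  intro w hw hwx
  rcases List.mem_cons.mp hw with h | h
  · omega
  · rcases List.mem_cons.mp h with h' | h'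
    · omega
    · have := (List.pairwise_cons.mp (List.pairwise_cons.mp hs).2).1 w h'
      omega

theorem pvPd_cons_drop (p x : Int) (t : List Int) (h0x : 0 ≤ x)
    (hs : (p :: x :: t).Pairwise (· < ·)) (y : Int) (hy : y ∈ t) :
    pvPd (p :: x :: t) y = pvPd (x :: t) y := by
  have hxy : x < y := (List.pairwise_cons.mp (List.pairwise_cons.mp hs).2).1 y hy
  obtain ⟨h1, h2, h3⟩ := pvPd_spec (x :: t) y
  have hq : x ≤ pvPd (x :: t) y := h2 x (by simp) hxy
  rcases h1 with h | h
  · omega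
  · apply pvPd_unique _ _ _ (by omega) (List.mem_cons_of_mem _ h.1) h.2
    intro w hw hwy
    rcases List.mem_cons.mp hw with h' | h'
    · have : p < x := (List.pairwise_cons.mp hs).1 x (by simp)
      omega
    · exact h2 w h' hwy

-- characterization of one round by predecessors (on sorted lists)
theorem pvRemGo_eq_filter (nums : List Int) (n : Int) (p : Int) (t : List Int)
    (hs : (p :: t).Pairwise (· < ·)) (hb : ∀ w ∈ p :: t, 0 ≤ w ∧ w < n) :
    pvRemGo nums p t = t.filter (fun x =>
      decide (0 ≤ pvPd (p :: t) x) && decide (pvVal nums x < pvVal nums (pvPd (p :: t) x))) := by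
  induction t generalizing p with
  | nil => rfl
  | cons x t' ih =>
    have hp0 : 0 ≤ p := (hb p (by simp)).1
    have hx0 : 0 ≤ x := (hb x (by simp)).1
    have hpx : pvPd (p :: x :: t') x = p := pvPd_cons_second p x t' (by omega) hs
    have hdrop : ∀ y ∈ t', pvPd (p :: x :: t') y = pvPd (x :: t') y := fun y hy =>
      pvPd_cons_drop p x t' hx0 hs y hy
    have hs' : (x :: t').Pairwise (· < ·) := (List.pairwise_cons.mp hs).2
    have hb' : ∀ w ∈ x :: t', 0 ≤ w ∧ w < n := fun w hw => hb w (List.mem_cons_of_mem _ hw)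
    have htail : t'.filter (fun y =>
          decide (0 ≤ pvPd (p :: x :: t') y) && decide (pvVal nums y < pvVal nums (pvPd (p :: x :: t') y)))
        = t'.filter (fun y =>
          decide (0 ≤ pvPd (x :: t') y) && decide (pvVal nums y < pvVal nums (pvPd (x :: t') y))) := by
      apply List.filter_congr
      intro y hy
      rw [hdrop y hy]
    show pvRemGo nums p (x :: t') = _
    rw [List.filter_cons]
    simp only [hpx, htail, ← ih x hs' hb']
    by_cases h : pvVal nums x < pvVal nums p
    · simp [pvRemGo, h, hp0]
    · simp [pvRemGo, h, hp0]

theorem pvRem_eq_filter (nums : List Int) (n : Int) (s : List Int) (hs : pvSN n s) :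
    pvRem nums s = s.filter (fun x =>
      decide (0 ≤ pvPd s x) && decide (pvVal nums x < pvVal nums (pvPd s x))) := by
  cases s with
  | nil => rfl
  | cons h t =>
    have hhead : pvPd (h :: t) h = -1 := pvPd_cons_head h t hs.1
    show pvRemGo nums h t = _
    rw [List.filter_cons]
    simp only [hhead]
    simpa using pvRemGo_eq_filter nums n h t hs.1 hs.2

theorem pvKeepGo_eq_filter (nums : List Int) (n : Int) (p : Int) (t : List Int)
    (hs : (p :: t).Pairwise (· < ·)) (hb : ∀ w ∈ p :: t, 0 ≤ w ∧ w < n) :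
    pvKeepGo nums p t = t.filter (fun x =>
      !(decide (0 ≤ pvPd (p :: t) x) && decide (pvVal nums x < pvVal nums (pvPd (p :: t) x)))) := by
  induction t generalizing p with
  | nil => rfl
  | cons x t' ih =>
    have hp0 : 0 ≤ p := (hb p (by simp)).1
    have hx0 : 0 ≤ x := (hb x (by simp)).1
    have hpx : pvPd (p :: x :: t') x = p := pvPd_cons_second p x t' (by omega) hs
    have hdrop : ∀ y ∈ t', pvPd (p :: x :: t') y = pvPd (x :: t') y := fun y hy =>
      pvPd_cons_drop p x t' hx0 hs y hy
    have hs' : (x :: t').Pairwise (· < ·) := (List.pairwise_cons.mp hs).2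
    have hb' : ∀ w ∈ x :: t', 0 ≤ w ∧ w < n := fun w hw => hb w (List.mem_cons_of_mem _ hw)
    have htail : t'.filter (fun y =>
          !(decide (0 ≤ pvPd (p :: x :: t') y) && decide (pvVal nums y < pvVal nums (pvPd (p :: x :: t') y))))
        = t'.filter (fun y =>
          !(decide (0 ≤ pvPd (x :: t') y) && decide (pvVal nums y < pvVal nums (pvPd (x :: t') y)))) := by
      apply List.filter_congr
      intro y hy
      rw [hdrop y hy]
    show pvKeepGo nums p (x :: t') = _
    rw [List.filter_cons]
    simp only [hpx, htail, ← ih x hs' hb']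
    by_cases h : pvVal nums x < pvVal nums p
    · simp [pvKeepGo, h, hp0]
    · simp [pvKeepGo, h, hp0]

theorem pvStep_eq_filter (nums : List Int) (n : Int) (s : List Int) (hs : pvSN n s) :
    pvStep nums s = s.filter (fun x =>
      !(decide (0 ≤ pvPd s x) && decide (pvVal nums x < pvVal nums (pvPd s x)))) := by
  cases s with
  | nil => rfl
  | cons h t =>
    have hhead : pvPd (h :: t) h = -1 := pvPd_cons_head h t hs.1
    show h :: pvKeepGo nums h t = _
    rw [List.filter_cons]
    simp only [hhead]
    simpa using pvKeepGo_eq_filter nums n h t hs.1 hs.2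

theorem pvRem_mem_iff (nums : List Int) (n : Int) (s : List Int) (hs : pvSN n s) (x : Int) :
    x ∈ pvRem nums s ↔ x ∈ s ∧ 0 ≤ pvPd s x ∧ pvVal nums x < pvVal nums (pvPd s x) := by
  rw [pvRem_eq_filter nums n s hs, List.mem_filter]
  simp

theorem pvStep_mem_iff (nums : List Int) (n : Int) (s : List Int) (hs : pvSN n s) (x : Int) :
    x ∈ pvStep nums s ↔ x ∈ s ∧ ¬ (0 ≤ pvPd s x ∧ pvVal nums x < pvVal nums (pvPd s x)) := by
  rw [pvStep_eq_filter nums n s hs, List.mem_filter]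
  simp only [Bool.not_eq_true', Bool.and_eq_false_iff, decide_eq_false_iff_not, not_lt, not_le]
  constructor
  · rintro ⟨h1, h2⟩
    refine ⟨h1, ?_⟩
    rintro ⟨h3, h4⟩
    rcases h2 with h | h <;> omega
  · rintro ⟨h1, h2⟩
    refine ⟨h1, ?_⟩
    by_cases h3 : 0 ≤ pvPd s x
    · right
      by_contra h4
      exact h2 ⟨h3, by omega⟩
    · left; omega

theorem pvPartition (nums : List Int) (n : Int) (s : List Int) (hs : pvSN n s) (x : Int) :
    x ∈ s ↔ (x ∈ pvRem nums s ∨ x ∈ pvStep nums s) := by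
  rw [pvRem_mem_iff nums n s hs, pvStep_mem_iff nums n s hs]
  by_cases h : 0 ≤ pvPd s x ∧ pvVal nums x < pvVal nums (pvPd s x) <;> tauto

theorem pvRem_step_disjoint (nums : List Int) (n : Int) (s : List Int) (hs : pvSN n s) (x : Int)
    (h1 : x ∈ pvRem nums s) (h2 : x ∈ pvStep nums s) : False := by
  rw [pvRem_mem_iff nums n s hs] at h1
  rw [pvStep_mem_iff nums n s hs] at h2
  tauto

theorem pvRem_iff_not_step (nums : List Int) (n : Int) (s : List Int) (hs : pvSN n s) (x : Int) :
    x ∈ pvRem nums s ↔ x ∈ s ∧ x ∉ pvStep nums s := by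
  constructor
  · intro h
    refine ⟨(pvPartition nums n s hs x).mpr (Or.inl h), fun h2 => pvRem_step_disjoint nums n s hs x h h2⟩
  · rintro ⟨h1, h2⟩
    rcases (pvPartition nums n s hs x).mp h1 with h | h
    · exact h
    · exact absurd h h2

theorem pvSN_step (nums : List Int) (n : Int) (s : List Int) (hs : pvSN n s) :
    pvSN n (pvStep nums s) := by
  rw [pvStep_eq_filter nums n s hs]
  exact ⟨hs.1.sublist List.filter_sublist, fun x hx => hs.2 x (List.mem_of_mem_filter hx)⟩

theorem pvSN_rem (nums : List Int) (n : Int) (s : List Int) (hs : pvSN n s) :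
    pvSN n (pvRem nums s) := by
  rw [pvRem_eq_filter nums n s hs]
  exact ⟨hs.1.sublist List.filter_sublist, fun x hx => hs.2 x (List.mem_of_mem_filter hx)⟩

theorem pvSurv_SN (nums : List Int) (k : Nat) : pvSN (nums.length : Int) (pvSurv nums k) := by
  induction k with
  | zero =>
    constructor
    · exact PySem.List.pairwise_lt_pyRange_one 0 (nums.length : Int)
    · intro x hx
      have := (PySem.List.mem_pyRange_one).mp hx
      omega
  | succ k ih => exact pvSN_step nums _ _ ih

theorem pvStep_zero_mem (nums : List Int) (n : Int) (s : List Int) (hs : pvSN n s)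
    (h0 : (0:Int) ∈ s) : (0:Int) ∈ pvStep nums s := by
  cases s with
  | nil => simp at h0
  | cons h t =>
    have hh : h = 0 := by
      rcases List.mem_cons.mp h0 with h' | h'
      · omega
      · have h1 := (List.pairwise_cons.mp hs.1).1 0 h'
        have h2 := (hs.2 h (by simp)).1
        omega
    show (0:Int) ∈ h :: pvKeepGo nums h t
    simp [hh]

theorem pvSurv_zero_mem (nums : List Int) (k : Nat) (h : pvSurv nums k ≠ []) :
    (0:Int) ∈ pvSurv nums k := by
  induction k with
  | zero =>
    have hlen : (0:Int) < (nums.length : Int) := by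
      by_contra hc
      apply h
      show PySem.List.pyRange 0 (nums.length : Int) 1 = []
      exact PySem.List.pyRange_one_eq_nil (by omega)
    exact (PySem.List.mem_pyRange_one).mpr ⟨le_refl _, hlen⟩
  | succ k ih =>
    have hk : pvSurv nums k ≠ [] := by
      intro hc
      apply h
      show pvStep nums (pvSurv nums k) = []
      rw [hc]
      rfl
    exact pvStep_zero_mem nums _ _ (pvSurv_SN nums k) (ih hk)

-- triggers: the predecessor (in the current survivor list) of a next-round
-- removal was itself removed in the current round
theorem pvTrigTotal (nums : List Int) (n : Int) (s : List Int) (hs : pvSN n s) (y : Int)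
    (hy : y ∈ pvRem nums (pvStep nums s)) : pvPd s y ∈ pvRem nums s := by
  have hs' := pvSN_step nums n s hs
  rw [pvRem_mem_iff nums n _ hs'] at hy
  obtain ⟨hys', hpd0, hval⟩ := hy
  have hys : y ∈ s := ((pvStep_mem_iff nums n s hs y).mp hys').1
  obtain ⟨hA, hB, hC⟩ := pvPd_spec s y
  obtain ⟨hA', hB', hC'⟩ := pvPd_spec (pvStep nums s) y
  have hmem' : pvPd (pvStep nums s) y ∈ pvStep nums s ∧ pvPd (pvStep nums s) y < y := by
    rcases hA' with h | h
    · omega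
    · exact h
  have hle : pvPd (pvStep nums s) y ≤ pvPd s y :=
    hB _ ((pvStep_mem_iff nums n s hs _).mp hmem'.1).1 hmem'.2
  have hmem : pvPd s y ∈ s ∧ pvPd s y < y := by
    rcases hA with h | h
    · omega
    · exact h
  rcases (pvPartition nums n s hs (pvPd s y)).mp hmem.1 with h | h
  · exact h
  · exfalso
    have hge' : pvPd s y ≤ pvPd (pvStep nums s) y := hB' _ h hmem.2
    have heq : pvPd (pvStep nums s) y = pvPd s y := by omega
    have : y ∈ pvRem nums s := by
      rw [pvRem_mem_iff nums n s hs]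
      exact ⟨hys, by omega, by rw [← heq]; exact hval⟩
    exact pvRem_step_disjoint nums n s hs y this hys'

-- triggers are strictly monotone along the next-round removals
theorem pvTrigMono (nums : List Int) (n : Int) (s : List Int) (hs : pvSN n s) :
    (pvRem nums (pvStep nums s)).Pairwise (fun a b => pvPd s a < pvPd s b) := by
  have hs' := pvSN_step nums n s hs
  have hsr := pvSN_rem nums n _ hs'
  apply List.Pairwise.imp_of_mem (l := pvRem nums (pvStep nums s))
    (R := fun a b => a < b) ?_ hsr.1
  intro a b ha hb hab
  have ha' : a ∈ pvStep nums s := by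
    rw [pvRem_mem_iff nums n _ hs'] at ha
    exact ha.1
  have hb' := hb
  rw [pvRem_mem_iff nums n _ hs'] at hb'
  have htb := pvTrigTotal nums n s hs b hb
  obtain ⟨hA, hB, hC⟩ := pvPd_spec s a
  have ha0 : 0 ≤ a := (hs'.2 a ha').1
  have h1 : pvPd s a < a := by
    rcases hA with h | h
    · omega
    · exact h.2
  have h2 : a ≤ pvPd (pvStep nums s) b := (pvPd_spec (pvStep nums s) b).2.1 a ha' hab
  have h3 : pvPd (pvStep nums s) b ≤ pvPd s b := by
    obtain ⟨hA', _, _⟩ := pvPd_spec (pvStep nums s) b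
    rcases hA' with h | h
    · omega
    · exact (pvPd_spec s b).2.1 _ ((pvStep_mem_iff nums n s hs _).mp h.1).1 h.2
  have h4 : pvPd (pvStep nums s) b ≠ pvPd s b := by
    intro heq
    apply pvRem_step_disjoint nums n s hs (pvPd s b) htb
    rw [← heq]
    obtain ⟨hA', _, _⟩ := pvPd_spec (pvStep nums s) b
    rcases hA' with h | h
    · omega
    · exact h.1
  omega

-- fixpoint facts
theorem pvKeepGo_sublist (nums : List Int) (p : Int) (t : List Int) :
    (pvKeepGo nums p t).Sublist t := by
  induction t generalizing p with
  | nil => simp [pvKeepGo]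
  | cons x t ih =>
    simp only [pvKeepGo]
    split
    · exact (ih x).trans (List.sublist_cons_self x t)
    · exact (ih x).cons₂ x

theorem pvStep_sublist (nums : List Int) (s : List Int) : (pvStep nums s).Sublist s := by
  cases s with
  | nil => simp [pvStep]
  | cons h t => exact (pvKeepGo_sublist nums h t).cons₂ h

theorem pvStep_eq_self (nums : List Int) (s : List Int) (h : pvRem nums s = []) :
    pvStep nums s = s := by
  apply (pvStep_sublist nums s).eq_of_length
  have h1 := pvStep_rem_length nums s
  rw [h] at h1
  simpa using h1

theorem pvFix_step (nums : List Int) (s : List Int) :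
    pvFix nums (pvStep nums s) = pvFix nums s := by
  by_cases h : pvRem nums s = []
  · rw [pvStep_eq_self nums s h]
  · conv_rhs => rw [pvFix]
    rw [if_neg h]

theorem pvFix_length_le (nums : List Int) (s : List Int) :
    (pvFix nums s).length ≤ s.length := by
  rw [pvFix]
  split
  · exact Nat.le_refl _
  · rename_i h
    have h1 := pvStep_rem_length nums s
    have h2 : (pvRem nums s).length ≠ 0 := by simpa using h
    have h3 := pvFix_length_le nums (pvStep nums s)
    omega
termination_by s.length
decreasing_by
  omega

-- ---------- generic split lemmas for monotone filters ----------

theorem pvFilter_le_split (L : List Int) (f : Int → Int) (u : Int)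
    (hmono : L.Pairwise (fun a b => f a < f b)) :
    L.filter (fun y => decide (f y ≤ u)) =
      L.filter (fun y => decide (f y < u)) ++ L.filter (fun y => decide (f y = u)) := by
  induction L with
  | nil => simp
  | cons y t ih =>
    obtain ⟨hy, ht⟩ := List.pairwise_cons.mp hmono
    have ih' := ih ht
    rcases lt_trichotomy (f y) u with h | h | h
    · simp only [List.filter_cons]
      rw [if_pos (by simpa using le_of_lt h), if_pos (by simpa using h),
        if_neg (by simp; omega)]
      simp [ih']
    · have h1 : t.filter (fun z => decide (f z < u)) = [] := by
        rw [List.filter_eq_nil_iff]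
        intro z hz
        have := hy z hz
        simp
        omega
      have h2 : t.filter (fun z => decide (f z = u)) = [] := by
        rw [List.filter_eq_nil_iff]
        intro z hz
        have := hy z hz
        simp
        omega
      have h3 : t.filter (fun z => decide (f z ≤ u)) = [] := by
        rw [List.filter_eq_nil_iff]
        intro z hz
        have := hy z hz
        simp
        omega
      simp only [List.filter_cons]
      rw [if_pos (by simp; omega), if_neg (by simp; omega), if_pos (by simpa using h)]
      simp [h1, h2, h3]
    · simp only [List.filter_cons]
      rw [if_neg (by simp; omega), if_neg (by simp; omega), if_neg (by simp; omega)]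
      exact ih'

theorem pvFilter_eq_singleton (L : List Int) (f : Int → Int) (u x : Int)
    (hmono : L.Pairwise (fun a b => f a < f b)) (hx : x ∈ L) (hfx : f x = u) :
    L.filter (fun y => decide (f y = u)) = [x] := by
  induction L with
  | nil => simp at hx
  | cons y t ih =>
    obtain ⟨hy, ht⟩ := List.pairwise_cons.mp hmono
    rcases List.mem_cons.mp hx with h | h
    · subst h
      have h2 : t.filter (fun z => decide (f z = u)) = [] := by
        rw [List.filter_eq_nil_iff]
        intro z hz
        have := hy z hz
        simp
        omega
      simp only [List.filter_cons]
      rw [if_pos (by simpa using hfx)]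
      simp [h2]
    · have hne : f y ≠ u := by
        have := hy x h
        omega
      simp only [List.filter_cons]
      rw [if_neg (by simpa using hne)]
      exact ih ht h

-- ---------- support lemmas for the main invariant ----------

theorem pvRem_subset (nums : List Int) (n : Int) (s : List Int) (hs : pvSN n s) (x : Int)
    (h : x ∈ pvRem nums s) : x ∈ s := ((pvRem_mem_iff nums n s hs x).mp h).1

theorem pvZero_not_rem (nums : List Int) (n : Int) (s : List Int) (hs : pvSN n s) :
    (0:Int) ∉ pvRem nums s := by
  intro h
  rw [pvRem_mem_iff nums n s hs] at h
  obtain ⟨h1, h2, h3⟩ := h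
  obtain ⟨hA, hB, hC⟩ := pvPd_spec s 0
  rcases hA with h' | h'
  · omega
  · have := (hs.2 _ h'.1).1
    omega

theorem pvU_mem (nums : List Int) (e : Nat) (done : List Int) (v : Int) :
    v ∈ pvU nums e done ↔ v ∈ pvSurv nums e ∧ v ∉ done := by
  unfold pvU
  rw [List.mem_filter]
  simp

theorem pvSN_U (nums : List Int) (e : Nat) (done : List Int) :
    pvSN (nums.length : Int) (pvU nums e done) := by
  have hs := pvSurv_SN nums e
  exact ⟨hs.1.sublist List.filter_sublist, fun x hx => hs.2 x (List.mem_of_mem_filter hx)⟩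

theorem pvSplit (L1 : List Int) (u : Int) (L2 : List Int)
    (h : (L1 ++ u :: L2).Pairwise (· < ·)) :
    (∀ w ∈ L1, w < u) ∧ (∀ w ∈ L2, u < w) := by
  rw [List.pairwise_append] at h
  exact ⟨fun w hw => h.2.2 w hw u (by simp),
    fun w hw => (List.pairwise_cons.mp h.2.1).1 w hw⟩

theorem pvDoneChar (nums : List Int) (e : Nat) (done : List Int) (u : Int) (todo' : List Int)
    (hQ : pvRem nums (pvSurv nums e) = done ++ u :: todo') (w : Int) :
    w ∈ done ↔ w ∈ pvRem nums (pvSurv nums e) ∧ w < u := by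
  have hsr := pvSN_rem nums _ _ (pvSurv_SN nums e)
  rw [hQ] at hsr
  have hsp := pvSplit done u todo' hsr.1
  constructor
  · intro h
    exact ⟨by rw [hQ]; exact List.mem_append_left _ h, hsp.1 w h⟩
  · rintro ⟨h1, h2⟩
    rw [hQ] at h1
    rcases List.mem_append.mp h1 with h | h
    · exact h
    · rcases List.mem_cons.mp h with h' | h'
      · omega
      · have := hsp.2 w h'
        omega

-- basic facts about the popped element and its neighbours
theorem pvBasics (nums : List Int) (e : Nat) (done : List Int) (u : Int) (todo' : List Int)
    (hQ : pvRem nums (pvSurv nums e) = done ++ u :: todo') :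
    u ∈ pvU nums e done ∧ (0:Int) ∈ pvU nums e done ∧ 0 < u ∧ u < (nums.length : Int) ∧
      u ∈ pvSurv nums e := by
  have hs := pvSurv_SN nums e
  have hsne : pvSurv nums e ≠ [] := by
    intro hc
    have h1 : pvRem nums (pvSurv nums e) = [] := by rw [hc]; rfl
    rw [hQ] at h1
    simp at h1
  have hu_rem : u ∈ pvRem nums (pvSurv nums e) := by
    rw [hQ]
    exact List.mem_append_right _ (by simp)
  have hu_s : u ∈ pvSurv nums e := pvRem_subset nums _ _ hs u hu_rem
  have hu0 : 0 ≤ u := (hs.2 u hu_s).1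
  have hun : u < (nums.length : Int) := (hs.2 u hu_s).2
  have hupos : 0 < u := by
    rcases eq_or_lt_of_le hu0 with h | h
    · exfalso
      exact pvZero_not_rem nums _ _ hs (by rwa [← h] at hu_rem)
    · exact h
  have h0s : (0:Int) ∈ pvSurv nums e := pvSurv_zero_mem nums e hsne
  have h0d : (0:Int) ∉ done := by
    intro hc
    have := (pvDoneChar nums e done u todo' hQ 0).mp hc
    exact pvZero_not_rem nums _ _ hs this.1
  have hud : u ∉ done := by
    intro hc
    have := (pvDoneChar nums e done u todo' hQ u).mp hc
    omega
  exact ⟨(pvU_mem nums e done u).mpr ⟨hu_s, hud⟩,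
    (pvU_mem nums e done 0).mpr ⟨h0s, h0d⟩, hupos, hun, hu_s⟩

-- neighbours of u in U
theorem pvPX (nums : List Int) (e : Nat) (done : List Int) (u : Int) (todo' : List Int)
    (hQ : pvRem nums (pvSurv nums e) = done ++ u :: todo') :
    (0 ≤ pvPd (pvU nums e done) u ∧ pvPd (pvU nums e done) u ∈ pvU nums e done ∧
      pvPd (pvU nums e done) u < u) ∧
    (u < pvSc (nums.length : Int) (pvU nums e done) u ∧
      pvSc (nums.length : Int) (pvU nums e done) u ≤ (nums.length : Int) ∧
      (pvSc (nums.length : Int) (pvU nums e done) u < (nums.length : Int) →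
        pvSc (nums.length : Int) (pvU nums e done) u ∈ pvU nums e done)) ∧
    (∀ w ∈ pvU nums e done, pvPd (pvU nums e done) u < w →
      w < pvSc (nums.length : Int) (pvU nums e done) u → w = u) := by
  obtain ⟨hu, h0, hupos, hun, hu_s⟩ := pvBasics nums e done u todo' hQ
  obtain ⟨pA, pB, pC⟩ := pvPd_spec (pvU nums e done) u
  obtain ⟨sA, sB, sC⟩ := pvSc_spec (nums.length : Int) (pvU nums e done) u
  have hp0 : 0 ≤ pvPd (pvU nums e done) u := le_trans (by omega) (pB 0 h0 hupos)
  have hpU : pvPd (pvU nums e done) u ∈ pvU nums e done ∧ pvPd (pvU nums e done) u < u := by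
    rcases pA with h | h
    · omega
    · exact h
  have hxgt : u < pvSc (nums.length : Int) (pvU nums e done) u := by
    rcases sA with h | h
    · omega
    · exact h.2
  refine ⟨⟨hp0, hpU.1, hpU.2⟩, ⟨hxgt, sC, ?_⟩, ?_⟩
  · intro hlt
    rcases sA with h | h
    · omega
    · exact h.1
  · intro w hw hw1 hw2
    by_contra hne
    rcases lt_or_gt_of_ne hne with h | h
    · have := pB w hw h
      omega
    · have := sB w hw h
      omega

-- the interval (u, x) contains no survivor-list elements at all
theorem pvGapUX (nums : List Int) (e : Nat) (done : List Int) (u : Int) (todo' : List Int)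
    (hQ : pvRem nums (pvSurv nums e) = done ++ u :: todo') :
    ∀ w ∈ pvSurv nums e, u < w → w < pvSc (nums.length : Int) (pvU nums e done) u → False := by
  intro w hw h1 h2
  obtain ⟨_, _, hmid⟩ := pvPX nums e done u todo' hQ
  by_cases hwU : w ∈ pvU nums e done
  · have := hmid w hwU (by
      obtain ⟨⟨_, _, hpu⟩, _, _⟩ := pvPX nums e done u todo' hQ
      omega) h2
    omega
  · have hwd : w ∈ done := by
      have hn := (pvU_mem nums e done w).not.mp hwU
      by_contra hc
      exact hn ⟨hw, hc⟩
    have := (pvDoneChar nums e done u todo' hQ w).mp hwd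
    omega

-- the interval (p, u) contains no next-survivor elements
theorem pvGapPU (nums : List Int) (e : Nat) (done : List Int) (u : Int) (todo' : List Int)
    (hQ : pvRem nums (pvSurv nums e) = done ++ u :: todo') :
    ∀ w ∈ pvStep nums (pvSurv nums e), pvPd (pvU nums e done) u < w → w < u → False := by
  intro w hw h1 h2
  have hs := pvSurv_SN nums e
  have hws : w ∈ pvSurv nums e := ((pvStep_mem_iff nums _ _ hs w).mp hw).1
  have hwnr : w ∉ pvRem nums (pvSurv nums e) := fun hc =>
    pvRem_step_disjoint nums _ _ hs w hc hw
  have hwnd : w ∉ done := fun hc => hwnr ((pvDoneChar nums e done u todo' hQ w).mp hc).1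
  have hwU : w ∈ pvU nums e done := (pvU_mem nums e done w).mpr ⟨hws, hwnd⟩
  obtain ⟨⟨_, _, _⟩, ⟨hux, _, _⟩, hmid⟩ := pvPX nums e done u todo' hQ
  have := hmid w hwU h1 (by omega)
  omega

theorem pvGetSet (xs : List Int) (i v j : Int) (hi : 0 ≤ i) (hil : i < (xs.length : Int))
    (hj : 0 ≤ j) (hjl : j < (xs.length : Int)) :
    PySem.List.pyGetD (PySem.List.pySetD xs i v) j 0
      = if j = i then v else PySem.List.pyGetD xs j 0 := by
  rw [PySem.List.pySetD_of_nonneg xs v hi]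
  have hjl' : j.toNat < xs.length := by omega
  rw [PySem.List.pyGetD_eq_getElem (xs.set i.toNat v) 0 hj (by simpa using hjl),
    PySem.List.pyGetD_eq_getElem xs 0 hj (by simpa using hjl)]
  by_cases h : j = i
  · rw [if_pos h]
    subst h
    rw [List.getElem_set_self]
  · rw [if_neg h]
    rw [List.getElem_set_ne (by omega)]

-- p survives the current round
theorem pvP_in_step (nums : List Int) (e : Nat) (done : List Int) (u : Int) (todo' : List Int)
    (hQ : pvRem nums (pvSurv nums e) = done ++ u :: todo') :
    pvPd (pvU nums e done) u ∈ pvStep nums (pvSurv nums e) := by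
  have hs := pvSurv_SN nums e
  obtain ⟨⟨hp0, hpU, hpu⟩, _, _⟩ := pvPX nums e done u todo' hQ
  obtain ⟨hps, hpd⟩ := (pvU_mem nums e done _).mp hpU
  have hpnr : pvPd (pvU nums e done) u ∉ pvRem nums (pvSurv nums e) := by
    intro hc
    rw [hQ] at hc
    rcases List.mem_append.mp hc with h | h
    · exact hpd (by
        rw [pvDoneChar nums e done u todo' hQ, hQ]
        exact ⟨List.mem_append_left _ h, hpu⟩)
    · have hsr := pvSN_rem nums _ _ hs
      rw [hQ] at hsr
      have hsp := pvSplit done u todo' hsr.1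
      rcases List.mem_cons.mp h with h' | h'
      · omega
      · have := hsp.2 _ h'
        omega
  rcases (pvPartition nums _ _ hs _).mp hps with h | h
  · exact absurd h hpnr
  · exact h

-- the predecessor of x in the next survivor list is p
theorem pvPdStepX (nums : List Int) (e : Nat) (done : List Int) (u : Int) (todo' : List Int)
    (hQ : pvRem nums (pvSurv nums e) = done ++ u :: todo')
    (hx : pvSc (nums.length : Int) (pvU nums e done) u ∈ pvStep nums (pvSurv nums e)) :
    pvPd (pvStep nums (pvSurv nums e)) (pvSc (nums.length : Int) (pvU nums e done) u)
      = pvPd (pvU nums e done) u := by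
  have hs := pvSurv_SN nums e
  obtain ⟨⟨hp0, hpU, hpu⟩, ⟨hux, _, _⟩, _⟩ := pvPX nums e done u todo' hQ
  apply pvPd_unique _ _ _ (by omega) (pvP_in_step nums e done u todo' hQ) (by omega)
  intro w hw hwx
  by_contra hgt
  rw [not_le] at hgt
  have hws : w ∈ pvSurv nums e := ((pvStep_mem_iff nums _ _ hs w).mp hw).1
  have hwu : w ≠ u := by
    intro hc
    subst hc
    exact pvRem_step_disjoint nums _ _ hs w (by rw [hQ]; exact List.mem_append_right _ (by simp)) hw
  rcases lt_or_gt_of_ne hwu with h | h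
  · exact pvGapPU nums e done u todo' hQ w hw hgt h
  · exact pvGapUX nums e done u todo' hQ w hws h hwx

-- the predecessor of x in the current survivor list is u itself
theorem pvPdSX (nums : List Int) (e : Nat) (done : List Int) (u : Int) (todo' : List Int)
    (hQ : pvRem nums (pvSurv nums e) = done ++ u :: todo') :
    pvPd (pvSurv nums e) (pvSc (nums.length : Int) (pvU nums e done) u) = u := by
  obtain ⟨hu, _, hupos, _, hus⟩ := pvBasics nums e done u todo' hQ
  obtain ⟨_, ⟨hux, _, _⟩, _⟩ := pvPX nums e done u todo' hQ
  apply pvPd_unique _ _ _ (by omega) hus hux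
  intro w hw hwx
  by_contra hgt
  rw [not_le] at hgt
  exact pvGapUX nums e done u todo' hQ w hw (by omega) hwx

-- the only possible discovery at u is x
theorem pvNoOther (nums : List Int) (e : Nat) (done : List Int) (u : Int) (todo' : List Int)
    (hQ : pvRem nums (pvSurv nums e) = done ++ u :: todo') (y : Int)
    (hy : y ∈ pvRem nums (pvStep nums (pvSurv nums e))) (hpd : pvPd (pvSurv nums e) y = u) :
    y = pvSc (nums.length : Int) (pvU nums e done) u := by
  have hs := pvSurv_SN nums e
  have hs' := pvSN_step nums _ _ hs
  have hys' : y ∈ pvStep nums (pvSurv nums e) := pvRem_subset nums _ _ hs' y hy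
  have hys : y ∈ pvSurv nums e := ((pvStep_mem_iff nums _ _ hs y).mp hys').1
  have hynr : y ∉ pvRem nums (pvSurv nums e) := fun hc =>
    pvRem_step_disjoint nums _ _ hs y hc hys'
  have hynd : y ∉ done := fun hc => hynr ((pvDoneChar nums e done u todo' hQ y).mp hc).1
  have hyU : y ∈ pvU nums e done := (pvU_mem nums e done y).mpr ⟨hys, hynd⟩
  have hypd := pvPd_spec (pvSurv nums e) y
  have huy : u < y := by
    rcases hypd.1 with h | h
    · obtain ⟨_, _, hupos, _, _⟩ := pvBasics nums e done u todo' hQ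
      omega
    · omega
  have hxy : pvSc (nums.length : Int) (pvU nums e done) u ≤ y :=
    (pvSc_spec _ _ _).2.1 y hyU huy
  rcases eq_or_lt_of_le hxy with h | h
  · omega
  · exfalso
    have hyn : y < (nums.length : Int) := (hs.2 y hys).2
    obtain ⟨_, ⟨hux, _, hxmem⟩, _⟩ := pvPX nums e done u todo' hQ
    have hxU : pvSc (nums.length : Int) (pvU nums e done) u ∈ pvU nums e done :=
      hxmem (by omega)
    have hxs : pvSc (nums.length : Int) (pvU nums e done) u ∈ pvSurv nums e :=
      ((pvU_mem nums e done _).mp hxU).1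
    have := hypd.2.1 _ hxs h
    omega

-- the BFS enqueue test fires exactly on the next-round removal triggered by u
theorem pvPopCond (nums : List Int) (e : Nat) (done : List Int) (u : Int) (todo' : List Int)
    (hQ : pvRem nums (pvSurv nums e) = done ++ u :: todo') :
    ((¬ ((0 ≤ pvSc (nums.length : Int) (pvU nums e done) u ∧
          pvSc (nums.length : Int) (pvU nums e done) u < (nums.length : Int) ∧
          pvSc (nums.length : Int) (pvU nums e done) u ∉ pvSurv nums (e+1)) ∨
        pvSc (nums.length : Int) (pvU nums e done) u ∈ pvDisc nums e done)) ∧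
      pvSc (nums.length : Int) (pvU nums e done) u < (nums.length : Int) ∧
      pvVal nums (pvSc (nums.length : Int) (pvU nums e done) u) <
        pvVal nums (pvPd (pvU nums e done) u))
    ↔ (pvSc (nums.length : Int) (pvU nums e done) u ∈ pvRem nums (pvSurv nums (e+1)) ∧
       pvPd (pvSurv nums e) (pvSc (nums.length : Int) (pvU nums e done) u) = u) := by
  have hs := pvSurv_SN nums e
  have hs' := pvSN_step nums _ _ hs
  have hstep : pvSurv nums (e+1) = pvStep nums (pvSurv nums e) := rfl
  obtain ⟨⟨hp0, hpU, hpu⟩, ⟨hux, hxn, hxmem⟩, _⟩ := pvPX nums e done u todo' hQ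
  constructor
  · rintro ⟨hnd, hxlt, hval⟩
    have hxU : pvSc (nums.length : Int) (pvU nums e done) u ∈ pvU nums e done := hxmem hxlt
    have hxs : pvSc (nums.length : Int) (pvU nums e done) u ∈ pvSurv nums e :=
      ((pvU_mem nums e done _).mp hxU).1
    have hx0 : 0 ≤ pvSc (nums.length : Int) (pvU nums e done) u := (hs.2 _ hxs).1
    have hxs' : pvSc (nums.length : Int) (pvU nums e done) u ∈ pvSurv nums (e+1) := by
      by_contra hc
      exact hnd (Or.inl ⟨hx0, hxlt, hc⟩)
    refine ⟨?_, pvPdSX nums e done u todo' hQ⟩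
    rw [hstep]
    rw [pvRem_mem_iff nums (nums.length : Int) _ hs']
    rw [hstep] at hxs'
    refine ⟨hxs', ?_, ?_⟩
    · rw [pvPdStepX nums e done u todo' hQ hxs']
      omega
    · rw [pvPdStepX nums e done u todo' hQ hxs']
      exact hval
  · rintro ⟨hxrem, hxpd⟩
    rw [hstep] at hxrem
    have hxs' : pvSc (nums.length : Int) (pvU nums e done) u ∈ pvStep nums (pvSurv nums e) :=
      pvRem_subset nums _ _ hs' _ hxrem
    have hxs : pvSc (nums.length : Int) (pvU nums e done) u ∈ pvSurv nums e :=
      ((pvStep_mem_iff nums _ _ hs _).mp hxs').1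
    have hxlt : pvSc (nums.length : Int) (pvU nums e done) u < (nums.length : Int) :=
      (hs.2 _ hxs).2
    have hval : pvVal nums (pvSc (nums.length : Int) (pvU nums e done) u) <
        pvVal nums (pvPd (pvU nums e done) u) := by
      have := (pvRem_mem_iff nums (nums.length : Int) _ hs' _).mp hxrem
      rw [pvPdStepX nums e done u todo' hQ hxs'] at this
      exact this.2.2
    refine ⟨?_, hxlt, hval⟩
    rintro (h | h)
    · exact h.2.2 (by rw [hstep]; exact hxs')
    · unfold pvDisc at h
      have := List.of_mem_filter h
      rw [hxpd] at this
      have hu_done : u ∈ done := by simpa using this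
      have := (pvDoneChar nums e done u todo' hQ u).mp hu_done
      omega

-- processing u extends the discovered list by exactly the removals it triggers
theorem pvDiscSnoc (nums : List Int) (e : Nat) (done : List Int) (u : Int) (todo' : List Int)
    (hQ : pvRem nums (pvSurv nums e) = done ++ u :: todo') :
    pvDisc nums e (done ++ [u]) = pvDisc nums e done ++
      (pvRem nums (pvSurv nums (e+1))).filter
        (fun y => decide (pvPd (pvSurv nums e) y = u)) := by
  have hs := pvSurv_SN nums e
  have hstep : pvSurv nums (e+1) = pvStep nums (pvSurv nums e) := rfl
  have hmono : (pvRem nums (pvSurv nums (e+1))).Pairwise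
      (fun a b => pvPd (pvSurv nums e) a < pvPd (pvSurv nums e) b) := by
    rw [hstep]
    exact pvTrigMono nums (nums.length : Int) _ hs
  have htt : ∀ y ∈ pvRem nums (pvSurv nums (e+1)),
      pvPd (pvSurv nums e) y ∈ pvRem nums (pvSurv nums e) := by
    intro y hy
    rw [hstep] at hy
    exact pvTrigTotal nums (nums.length : Int) _ hs y hy
  have h1 : pvDisc nums e done = (pvRem nums (pvSurv nums (e+1))).filter
      (fun y => decide (pvPd (pvSurv nums e) y < u)) := by
    unfold pvDisc
    apply List.filter_congr
    intro y hy
    have := htt y hy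
    simp only [decide_eq_decide]
    rw [pvDoneChar nums e done u todo' hQ]
    tauto
  have h2 : pvDisc nums e (done ++ [u]) = (pvRem nums (pvSurv nums (e+1))).filter
      (fun y => decide (pvPd (pvSurv nums e) y ≤ u)) := by
    unfold pvDisc
    apply List.filter_congr
    intro y hy
    have hmem := htt y hy
    simp only [decide_eq_decide]
    constructor
    · intro h
      rcases List.mem_append.mp h with h' | h'
      · have := (pvDoneChar nums e done u todo' hQ _).mp h'
        omega
      · simp at h'
        omega
    · intro h
      rcases eq_or_lt_of_le h with h' | h'
      · exact List.mem_append_right _ (by simp [h'])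
      · exact List.mem_append_left _
          ((pvDoneChar nums e done u todo' hQ _).mpr ⟨hmem, h'⟩)
  rw [h1, h2]
  exact pvFilter_le_split _ _ u hmono

theorem pvU_snoc (nums : List Int) (e : Nat) (done : List Int) (u : Int) :
    pvU nums e (done ++ [u]) = (pvU nums e done).filter (fun v => decide (v ≠ u)) := by
  unfold pvU
  rw [List.filter_filter]
  apply List.filter_congr
  intro v _
  simp [List.mem_append, not_or, And.comm]

-- predecessors and successors in U after deleting u
theorem pvPdSc_erase (nums : List Int) (e : Nat) (done : List Int) (u : Int) (todo' : List Int)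
    (hQ : pvRem nums (pvSurv nums e) = done ++ u :: todo') :
    ∀ v ∈ (pvU nums e done).filter (fun v => decide (v ≠ u)),
      (pvPd ((pvU nums e done).filter (fun v => decide (v ≠ u))) v =
        (if v = pvSc (nums.length : Int) (pvU nums e done) u
          then pvPd (pvU nums e done) u else pvPd (pvU nums e done) v)) ∧
      (pvSc (nums.length : Int) ((pvU nums e done).filter (fun v => decide (v ≠ u))) v =
        (if v = pvPd (pvU nums e done) u
          then pvSc (nums.length : Int) (pvU nums e done) u
          else pvSc (nums.length : Int) (pvU nums e done) v)) := by
  intro v hv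
  obtain ⟨hvU, hvu'⟩ := List.mem_filter.mp hv
  have hvu : v ≠ u := by simpa using hvu'
  have hUsn := pvSN_U nums e done
  obtain ⟨⟨hp0, hpU, hpu⟩, ⟨hux, hxn, hxmem⟩, hmid⟩ := pvPX nums e done u todo' hQ
  have hvb := hUsn.2 v hvU
  constructor
  · by_cases hvx : v = pvSc (nums.length : Int) (pvU nums e done) u
    · rw [if_pos hvx]
      apply pvPd_unique _ _ _ (by omega)
        (List.mem_filter.mpr ⟨hpU, by simp; omega⟩) (by omega)
      intro w hw hwv
      obtain ⟨hwU, hwu'⟩ := List.mem_filter.mp hw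
      have hwu : w ≠ u := by simpa using hwu'
      by_contra hgt
      rw [not_le] at hgt
      have := hmid w hwU hgt (by omega)
      omega
    · rw [if_neg hvx]
      obtain ⟨qA, qB, qC⟩ := pvPd_spec (pvU nums e done) v
      rcases qA with h | h
      · rw [h]
        apply pvPd_neg
        intro w hw hwv
        have hwU := (List.mem_filter.mp hw).1
        have := qB w hwU hwv
        have := (hUsn.2 w hwU).1
        omega
      · have hqu : pvPd (pvU nums e done) v ≠ u := by
          intro hc
          apply hvx
          have huv : u < v := by omega
          have hvn : v < (nums.length : Int) := hvb.2
          have hxv : pvSc (nums.length : Int) (pvU nums e done) u ≤ v :=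
            (pvSc_spec _ _ _).2.1 v hvU huv
          rcases eq_or_lt_of_le hxv with h' | h'
          · omega
          · exfalso
            have hxU : pvSc (nums.length : Int) (pvU nums e done) u ∈ pvU nums e done :=
              hxmem (by omega)
            have := qB _ hxU h'
            omega
        apply pvPd_unique _ _ _ (by omega)
          (List.mem_filter.mpr ⟨h.1, by simpa using hqu⟩) h.2
        intro w hw hwv
        exact qB w (List.mem_filter.mp hw).1 hwv
  · by_cases hvp : v = pvPd (pvU nums e done) u
    · rw [if_pos hvp]
      by_cases hxlt : pvSc (nums.length : Int) (pvU nums e done) u < (nums.length : Int)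
      · apply pvSc_unique _ _ _ _ (by omega)
          (List.mem_filter.mpr ⟨hxmem hxlt, by simp; omega⟩) (by omega)
        intro w hw hvw
        obtain ⟨hwU, hwu'⟩ := List.mem_filter.mp hw
        have hwu : w ≠ u := by simpa using hwu'
        rcases lt_trichotomy w u with h | h | h
        · exfalso
          have := hmid w hwU (by omega) (by omega)
          omega
        · omega
        · exact (pvSc_spec _ _ _).2.1 w hwU h
      · have hxn' : pvSc (nums.length : Int) (pvU nums e done) u = (nums.length : Int) := by
          omega
        rw [hxn']
        apply pvSc_top
        intro w hw hvw
        obtain ⟨hwU, hwu'⟩ := List.mem_filter.mp hw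
        have hwu : w ≠ u := by simpa using hwu'
        have hwb := hUsn.2 w hwU
        rcases lt_trichotomy w u with h | h | h
        · have := hmid w hwU (by omega) (by omega)
          omega
        · omega
        · have := (pvSc_spec (nums.length : Int) (pvU nums e done) u).2.1 w hwU h
          omega
    · rw [if_neg hvp]
      obtain ⟨qA, qB, qC⟩ := pvSc_spec (nums.length : Int) (pvU nums e done) v
      rcases qA with h | h
      · rw [h]
        apply pvSc_top
        intro w hw hvw
        have hwU := (List.mem_filter.mp hw).1
        have := qB w hwU hvw
        have := (hUsn.2 w hwU).2
        omega
      · have hqu : pvSc (nums.length : Int) (pvU nums e done) v ≠ u := by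
          intro hc
          apply hvp
          symm
          apply pvPd_unique _ _ _ (by omega) hvU (by omega)
          intro w hw hwu
          by_contra hgt
          rw [not_le] at hgt
          have := qB w hw hgt
          omega
        apply pvSc_unique _ _ _ _ (by omega)
          (List.mem_filter.mpr ⟨h.1, by simpa using hqu⟩) h.2
        intro w hw hvw
        exact qB w (List.mem_filter.mp hw).1 hvw
  
-- pointer update: the arrays still realize the linked list after deleting u
theorem pvLinksUpdate (nums : List Int) (e : Nat) (done : List Int) (u : Int) (todo' : List Int)
    (l r : List Int)
    (hQ : pvRem nums (pvSurv nums e) = done ++ u :: todo')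
    (hlink : pvLinks (nums.length : Int) l r (pvU nums e done))
    (hl : l.length = nums.length) (hr : r.length = nums.length) :
    pvLinks (nums.length : Int)
      (if pvSc (nums.length : Int) (pvU nums e done) u < (nums.length : Int) then
        PySem.List.pySetD l (pvSc (nums.length : Int) (pvU nums e done) u)
          (pvPd (pvU nums e done) u) else l)
      (PySem.List.pySetD r (pvPd (pvU nums e done) u)
        (pvSc (nums.length : Int) (pvU nums e done) u))
      (pvU nums e (done ++ [u])) := by
  rw [pvU_snoc]
  intro v hv
  obtain ⟨hvU, hvu'⟩ := List.mem_filter.mp hv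
  have hvu : v ≠ u := by simpa using hvu'
  have hUsn := pvSN_U nums e done
  have hvb := hUsn.2 v hvU
  obtain ⟨⟨hp0, hpU, hpu⟩, ⟨hux, hxn, hxmem⟩, hmid⟩ := pvPX nums e done u todo' hQ
  have hpb := hUsn.2 _ hpU
  obtain ⟨hpd', hsc'⟩ := pvPdSc_erase nums e done u todo' hQ v hv
  constructor
  · rw [hpd']
    by_cases hxlt : pvSc (nums.length : Int) (pvU nums e done) u < (nums.length : Int)
    · rw [if_pos hxlt]
      rw [pvGetSet l _ _ v (by
          have := hUsn.2 _ (hxmem hxlt)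
          omega) (by
          have := hUsn.2 _ (hxmem hxlt)
          omega) (by omega) (by omega)]
      by_cases hvx : v = pvSc (nums.length : Int) (pvU nums e done) u
      · rw [if_pos hvx, if_pos hvx]
      · rw [if_neg hvx, if_neg hvx]
        exact (hlink v hvU).1
    · rw [if_neg hxlt]
      have hvx : v ≠ pvSc (nums.length : Int) (pvU nums e done) u := by omega
      rw [if_neg hvx]
      exact (hlink v hvU).1
  · rw [hsc']
    rw [pvGetSet r _ _ v (by omega) (by omega) (by omega) (by omega)]
    by_cases hvp : v = pvPd (pvU nums e done) u
    · rw [if_pos hvp, if_pos hvp]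
    · rw [if_neg hvp, if_neg hvp]
      exact (hlink v hvU).2

-- when the whole round has been processed, the unprocessed set is the next survivor list
theorem pvU_full (nums : List Int) (e : Nat) (done : List Int)
    (hfull : pvRem nums (pvSurv nums e) = done) :
    pvU nums e done = pvStep nums (pvSurv nums e) := by
  have hs := pvSurv_SN nums e
  rw [pvStep_eq_filter nums (nums.length : Int) _ hs]
  unfold pvU
  apply List.filter_congr
  intro v hvs
  have h1 : v ∈ pvRem nums (pvSurv nums e) ↔
      (0 ≤ pvPd (pvSurv nums e) v ∧ pvVal nums v < pvVal nums (pvPd (pvSurv nums e) v)) := by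
    rw [pvRem_mem_iff nums (nums.length : Int) _ hs]
    tauto
  rw [← hfull]
  by_cases h : v ∈ pvRem nums (pvSurv nums e)
  · have := h1.mp h
    simp [h, this.1, this.2]
  · have h2 := h1.not.mp h
    have hval : ¬ pvVal nums v < pvVal nums (pvPd (pvSurv nums e) v)
        ∨ ¬ 0 ≤ pvPd (pvSurv nums e) v := by
      by_cases h3 : 0 ≤ pvPd (pvSurv nums e) v
      · left
        intro h4
        exact h2 ⟨h3, h4⟩
      · right
        exact h3
    rcases hval with h' | h' <;> simp [h, h']

-- when the whole round has been processed, everything of the next round is discovered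
theorem pvDisc_full (nums : List Int) (e : Nat) (done : List Int)
    (hfull : pvRem nums (pvSurv nums e) = done) :
    pvDisc nums e done = pvRem nums (pvSurv nums (e+1)) := by
  unfold pvDisc
  apply List.filter_eq_self.mpr
  intro y hy
  have hs := pvSurv_SN nums e
  have := pvTrigTotal nums (nums.length : Int) _ hs y hy
  rw [hfull] at this
  simpa using this

-- the dict characterization shifts to the next round
theorem pvContains_shift (nums : List Int) (e : Nat) (x : Int) :
    (((0 ≤ x ∧ x < (nums.length : Int) ∧ x ∉ pvSurv nums (e+1)) ∨
        x ∈ pvRem nums (pvSurv nums (e+1))))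
    ↔ (0 ≤ x ∧ x < (nums.length : Int) ∧ x ∉ pvSurv nums (e+2)) := by
  have hs1 := pvSurv_SN nums (e+1)
  have hstep : pvSurv nums (e+2) = pvStep nums (pvSurv nums (e+1)) := rfl
  constructor
  · rintro (⟨h1, h2, h3⟩ | h)
    · refine ⟨h1, h2, ?_⟩
      intro hc
      rw [hstep] at hc
      exact h3 ((pvStep_sublist nums _).mem hc)
    · have h' := (pvRem_iff_not_step nums (nums.length : Int) _ hs1 x).mp h
      have hb := hs1.2 x h'.1
      exact ⟨hb.1, hb.2, by rw [hstep]; exact h'.2⟩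
  · rintro ⟨h1, h2, h3⟩
    by_cases h : x ∈ pvSurv nums (e+1)
    · right
      rw [pvRem_iff_not_step nums (nums.length : Int) _ hs1]
      exact ⟨h, by rw [← hstep]; exact h3⟩
    · exact Or.inl ⟨h1, h2, h⟩

theorem pvLoopA_cons (nums : List Int) (fuel : Nat) (l r q : List Int) (u : Int)
    (dist : PySem.Dict Int Int) (ans : Int) :
    loopA nums (fuel+1) l r (u :: q) dist ans =
      (let n : Int := (nums.length : Int)
       let ans1 := max ans (dist.getD u 0)
       let l1 := if PySem.List.pyGetD r u 0 < n then
           PySem.List.pySetD l (PySem.List.pyGetD r u 0) (PySem.List.pyGetD l u 0) else l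
       let r1 := if PySem.List.pyGetD l1 u 0 > -1 then
           PySem.List.pySetD r (PySem.List.pyGetD l1 u 0) (PySem.List.pyGetD r u 0) else r
       if ¬ (dist.contains (PySem.List.pyGetD r1 u 0) = true) ∧ PySem.List.pyGetD r1 u 0 < n ∧
           PySem.List.pyGetD nums (PySem.List.pyGetD r1 u 0) 0 <
             PySem.List.pyGetD nums (PySem.List.pyGetD l1 u 0) 0 then
         loopA nums fuel l1 r1 (q ++ [PySem.List.pyGetD r1 u 0])
           (dist.insert (PySem.List.pyGetD r1 u 0) (dist.getD u 0 + 1)) ans1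
       else loopA nums fuel l1 r1 q dist ans1) := rfl

theorem pvMaxAns (e : Nat) (done : List Int) (ans : Int)
    (hans : ans = (if done = [] then max (e : Int) 1 else (e : Int) + 1)) :
    max ans ((e:Int) + 1) = (e:Int) + 1 := by
  subst hans
  by_cases h : done = []
  · rw [if_pos h]
    exact max_eq_right (max_le (by omega) (by omega))
  · rw [if_neg h]
    exact max_self _

theorem pvTerminal (nums : List Int) (e : Nat) (done : List Int)
    (hQ : pvRem nums (pvSurv nums e) = done) (hne : done ≠ [])
    (hdisc : pvDisc nums e done = []) :
    ((e:Int) + 1) = (e : Int) + (pvRoundsI nums (pvSurv nums e) : Int) := by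
  have h1 : pvRem nums (pvSurv nums e) ≠ [] := by rw [hQ]; exact hne
  have h2 : pvRem nums (pvSurv nums (e+1)) = [] := by
    rw [← pvDisc_full nums e done hQ]
    exact hdisc
  have h3 : pvRoundsI nums (pvSurv nums e) = 1 + pvRoundsI nums (pvStep nums (pvSurv nums e)) := by
    conv_lhs => rw [pvRoundsI]
    rw [if_neg h1]
  have h4 : pvRoundsI nums (pvStep nums (pvSurv nums e)) = 0 := by
    rw [pvRoundsI, if_pos (by exact h2)]
  rw [h3, h4]
  push_cast
  ring

theorem pvRoundsStep (nums : List Int) (e : Nat)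
    (hne : pvRem nums (pvSurv nums e) ≠ []) :
    ((e:Int) + 1) + (pvRoundsI nums (pvSurv nums (e+1)) : Int)
      = (e : Int) + (pvRoundsI nums (pvSurv nums e) : Int) := by
  have h3 : pvRoundsI nums (pvSurv nums e) = 1 + pvRoundsI nums (pvStep nums (pvSurv nums e)) := by
    conv_lhs => rw [pvRoundsI]
    rw [if_neg hne]
  have h5 : pvSurv nums (e+1) = pvStep nums (pvSurv nums e) := rfl
  rw [h3, h5]
  push_cast
  ring

-- ---------- the main BFS invariant lemma ----------

theorem pvLoopA_nil (nums : List Int) (f : Nat) (l r : List Int) (d : PySem.Dict Int Int) (a : Int) :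
    loopA nums f l r [] d a = a := by
  cases f <;> rfl

theorem pvU_nil (nums : List Int) (e : Nat) : pvU nums e [] = pvSurv nums e := by
  unfold pvU
  simp

theorem pvDisc_nil (nums : List Int) (e : Nat) : pvDisc nums e [] = [] := by
  unfold pvDisc
  simp

theorem pvMain (nums : List Int) :
    ∀ (fuel : Nat) (e : Nat) (done todo l r : List Int) (dist : PySem.Dict Int Int) (ans : Int),
    pvRem nums (pvSurv nums e) = done ++ todo →
    done ++ todo ≠ [] →
    (todo = [] → pvDisc nums e done = []) →
    pvLinks (nums.length : Int) l r (pvU nums e done) →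
    l.length = nums.length → r.length = nums.length →
    (∀ x : Int, dist.contains x = true ↔
      ((0 ≤ x ∧ x < (nums.length : Int) ∧ x ∉ pvSurv nums (e+1)) ∨ x ∈ pvDisc nums e done)) →
    (∀ x ∈ todo, dist.getD x 0 = (e : Int) + 1) →
    (∀ x ∈ pvDisc nums e done, dist.getD x 0 = (e : Int) + 2) →
    ans = (if done = [] then max (e : Int) 1 else (e : Int) + 1) →
    todo.length + ((pvSurv nums (e+1)).length - (pvFix nums (pvSurv nums (e+1))).length) ≤ fuel →
    loopA nums fuel l r (todo ++ pvDisc nums e done) dist ans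
      = (e : Int) + (pvRoundsI nums (pvSurv nums e) : Int) := by
  intro fuel
  induction fuel with
  | zero =>
    intro e done todo l r dist ans hQ hne hnorm hlink hl hr hco hvt hvd hans hfuel
    cases todo with
    | cons a b =>
      exfalso
      simp only [List.length_cons] at hfuel
      omega
    | nil =>
      have hdisc := hnorm rfl
      have hfull : pvRem nums (pvSurv nums e) = done := by simpa using hQ
      have hdone : done ≠ [] := by simpa using hne
      rw [hdisc]
      show loopA nums 0 l r [] dist ans = _
      rw [pvLoopA_nil, hans, if_neg hdone]
      exact pvTerminal nums e done hfull hdone hdisc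
  | succ f ih =>
    intro e done todo l r dist ans hQ hne hnorm hlink hl hr hco hvt hvd hans hfuel
    cases todo with
    | nil =>
      have hdisc := hnorm rfl
      have hfull : pvRem nums (pvSurv nums e) = done := by simpa using hQ
      have hdone : done ≠ [] := by simpa using hne
      rw [hdisc]
      show loopA nums (f+1) l r [] dist ans = _
      rw [pvLoopA_nil, hans, if_neg hdone]
      exact pvTerminal nums e done hfull hdone hdisc
    | cons u todo' =>
      have hs := pvSurv_SN nums e
      obtain ⟨huU, h0U, hupos, hun, hus⟩ := pvBasics nums e done u todo' hQ
      obtain ⟨⟨hp0, hpU, hpu⟩, ⟨hux, hxn, hxmem⟩, hmid⟩ := pvPX nums e done u todo' hQ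
      have hUsn := pvSN_U nums e done
      have hpb := hUsn.2 _ hpU
      have hlu : PySem.List.pyGetD l u 0 = pvPd (pvU nums e done) u := (hlink u huU).1
      have hru : PySem.List.pyGetD r u 0 = pvSc (nums.length : Int) (pvU nums e done) u := (hlink u huU).2
      have hgu : dist.getD u 0 = (e : Int) + 1 := hvt u (by simp)
      have huX : u ≠ pvSc (nums.length : Int) (pvU nums e done) u := by omega
      have huP : u ≠ pvPd (pvU nums e done) u := by omega
      have hl1u : PySem.List.pyGetD (if pvSc (nums.length : Int) (pvU nums e done) u < (nums.length : Int) then PySem.List.pySetD l (pvSc (nums.length : Int) (pvU nums e done) u) (pvPd (pvU nums e done) u) else l) u 0 = pvPd (pvU nums e done) u := by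
        by_cases hxlt : pvSc (nums.length : Int) (pvU nums e done) u < (nums.length : Int)
        · rw [if_pos hxlt, pvGetSet l _ _ u (by
              have := hUsn.2 _ (hxmem hxlt)
              omega) (by
              have := hUsn.2 _ (hxmem hxlt)
              omega) (by omega) (by omega), if_neg huX]
          exact hlu
        · rw [if_neg hxlt]
          exact hlu
      have hr1u : PySem.List.pyGetD (PySem.List.pySetD r (pvPd (pvU nums e done) u) (pvSc (nums.length : Int) (pvU nums e done) u)) u 0 = pvSc (nums.length : Int) (pvU nums e done) u := by
        rw [pvGetSet r _ _ u (by omega) (by omega) (by omega) (by omega), if_neg huP]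
        exact hru
      have hans1 := pvMaxAns e done ans hans
      rw [List.cons_append, pvLoopA_cons]
      simp only [hlu, hru, hgu, hl1u]
      have hp1 : (pvPd (pvU nums e done) u) > -1 := by omega
      rw [if_pos hp1]
      simp only [hr1u, hans1]
      have hiff : ((¬ (dist.contains (pvSc (nums.length : Int) (pvU nums e done) u) = true)) ∧
          pvSc (nums.length : Int) (pvU nums e done) u < (nums.length : Int) ∧
          PySem.List.pyGetD nums (pvSc (nums.length : Int) (pvU nums e done) u) 0 < PySem.List.pyGetD nums (pvPd (pvU nums e done) u) 0)
          ↔ ((pvSc (nums.length : Int) (pvU nums e done) u) ∈ pvRem nums (pvSurv nums (e+1)) ∧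
             pvPd (pvSurv nums e) (pvSc (nums.length : Int) (pvU nums e done) u) = u) := by
        have hpc := pvPopCond nums e done u todo' hQ
        unfold pvVal at hpc
        rw [hco (pvSc (nums.length : Int) (pvU nums e done) u)]
        exact hpc
      have hlink' := pvLinksUpdate nums e done u todo' l r hQ hlink hl hr
      have hQ'assoc : pvRem nums (pvSurv nums e) = (done ++ [u]) ++ todo' := by
        rw [hQ]
        simp
      have hl1len : ((if pvSc (nums.length : Int) (pvU nums e done) u < (nums.length : Int) then PySem.List.pySetD l (pvSc (nums.length : Int) (pvU nums e done) u) (pvPd (pvU nums e done) u) else l)).length = nums.length := by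
        by_cases hxlt : pvSc (nums.length : Int) (pvU nums e done) u < (nums.length : Int)
        · rw [if_pos hxlt, PySem.List.length_pySetD]
          exact hl
        · rw [if_neg hxlt]
          exact hl
      have hr1len : (PySem.List.pySetD r (pvPd (pvU nums e done) u) (pvSc (nums.length : Int) (pvU nums e done) u)).length = nums.length := by
        rw [PySem.List.length_pySetD]
        exact hr
      have hfuel' : todo'.length +
          ((pvSurv nums (e+1)).length - (pvFix nums (pvSurv nums (e+1))).length) ≤ f := by
        simp only [List.length_cons] at hfuel
        omega
      by_cases hcond : (¬ (dist.contains (pvSc (nums.length : Int) (pvU nums e done) u) = true)) ∧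
          pvSc (nums.length : Int) (pvU nums e done) u < (nums.length : Int) ∧
          PySem.List.pyGetD nums (pvSc (nums.length : Int) (pvU nums e done) u) 0 < PySem.List.pyGetD nums (pvPd (pvU nums e done) u) 0
      · -- discovery: x is enqueued with distance e+2
        rw [if_pos hcond]
        obtain ⟨hXrem, hXpd⟩ := hiff.mp hcond
        have hmono : (pvRem nums (pvSurv nums (e+1))).Pairwise
            (fun a b => pvPd (pvSurv nums e) a < pvPd (pvSurv nums e) b) :=
          pvTrigMono nums (nums.length : Int) _ hs
        have hsingle := pvFilter_eq_singleton (pvRem nums (pvSurv nums (e+1)))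
          (fun y => pvPd (pvSurv nums e) y) u (pvSc (nums.length : Int) (pvU nums e done) u) hmono hXrem hXpd
        have hdisc' : pvDisc nums e (done ++ [u]) = pvDisc nums e done ++ [pvSc (nums.length : Int) (pvU nums e done) u] := by
          rw [pvDiscSnoc nums e done u todo' hQ, hsingle]
        have hXstep : (pvSc (nums.length : Int) (pvU nums e done) u) ∈ pvSurv nums (e+1) :=
          pvRem_subset nums (nums.length : Int) _ (pvSurv_SN nums (e+1)) _ hXrem
        have hXnotrem : (pvSc (nums.length : Int) (pvU nums e done) u) ∉ pvRem nums (pvSurv nums e) := fun hc =>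
          pvRem_step_disjoint nums (nums.length : Int) _ hs _ hc hXstep
        have hXdisc : (pvSc (nums.length : Int) (pvU nums e done) u) ∉ pvDisc nums e done := by
          intro hc
          exact hcond.1 ((hco (pvSc (nums.length : Int) (pvU nums e done) u)).mpr (Or.inr hc))
        have hco' : ∀ z : Int, ((dist.insert (pvSc (nums.length : Int) (pvU nums e done) u) ((e : Int) + 1 + 1)).contains z = true) ↔
            ((0 ≤ z ∧ z < (nums.length : Int) ∧ z ∉ pvSurv nums (e+1)) ∨
              z ∈ pvDisc nums e (done ++ [u])) := by
          intro z
          rw [PySem.Dict.contains_insert, hdisc']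
          constructor
          · intro h
            rcases Bool.or_eq_true_iff.mp h with h' | h'
            · have hz : z = pvSc (nums.length : Int) (pvU nums e done) u := by simpa using h'
              subst hz
              right
              exact List.mem_append_right _ (by simp)
            · rcases (hco z).mp h' with h'' | h''
              · exact Or.inl h''
              · exact Or.inr (List.mem_append_left _ h'')
          · intro h
            rcases h with h' | h'
            · exact Bool.or_eq_true_iff.mpr (Or.inr ((hco z).mpr (Or.inl h')))
            · rcases List.mem_append.mp h' with h'' | h''
              · exact Bool.or_eq_true_iff.mpr (Or.inr ((hco z).mpr (Or.inr h'')))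
              · have hz : z = pvSc (nums.length : Int) (pvU nums e done) u := by simpa using h''
                subst hz
                exact Bool.or_eq_true_iff.mpr (Or.inl (by simp))
        have hvt' : ∀ z ∈ todo', (dist.insert (pvSc (nums.length : Int) (pvU nums e done) u) ((e : Int) + 1 + 1)).getD z 0 = (e : Int) + 1 := by
          intro z hz
          have hzrem : z ∈ pvRem nums (pvSurv nums e) := by
            rw [hQ]
            exact List.mem_append_right _ (List.mem_cons_of_mem _ hz)
          have hzX : z ≠ pvSc (nums.length : Int) (pvU nums e done) u := fun hc => hXnotrem (hc ▸ hzrem)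
          rw [PySem.Dict.getD_insert, if_neg hzX]
          exact hvt z (List.mem_cons_of_mem _ hz)
        have hvd' : ∀ z ∈ pvDisc nums e (done ++ [u]), (dist.insert (pvSc (nums.length : Int) (pvU nums e done) u) ((e : Int) + 1 + 1)).getD z 0 = (e : Int) + 2 := by
          intro z hz
          rw [hdisc'] at hz
          rcases List.mem_append.mp hz with h' | h'
          · have hzX : z ≠ pvSc (nums.length : Int) (pvU nums e done) u := fun hc => hXdisc (hc ▸ h')
            rw [PySem.Dict.getD_insert, if_neg hzX]
            exact hvd z h'
          · have hz' : z = pvSc (nums.length : Int) (pvU nums e done) u := by simpa using h'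
            subst hz'
            rw [PySem.Dict.getD_insert_self]
            ring
        by_cases hT : todo' = []
        · -- the round is finished: reinterpret the state at round e+1
          subst hT
          have hfull' : pvRem nums (pvSurv nums e) = done ++ [u] := by simpa using hQ
          have hdfull : pvDisc nums e (done ++ [u]) = pvRem nums (pvSurv nums (e+1)) :=
            pvDisc_full nums e _ hfull'
          have hremne : pvRem nums (pvSurv nums (e+1)) ≠ [] := by
            rw [← hdfull, hdisc']
            simp
        
          have hres := ih (e+1) [] (pvRem nums (pvSurv nums (e+1))) ((if pvSc (nums.length : Int) (pvU nums e done) u < (nums.length : Int) then PySem.List.pySetD l (pvSc (nums.length : Int) (pvU nums e done) u) (pvPd (pvU nums e done) u) else l)) (PySem.List.pySetD r (pvPd (pvU nums e done) u) (pvSc (nums.length : Int) (pvU nums e done) u)) (dist.insert (pvSc (nums.length : Int) (pvU nums e done) u) ((e : Int) + 1 + 1))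
            ((e : Int) + 1)
            (List.nil_append _).symm
            (by simpa using hremne)
            (fun _ => pvDisc_nil nums (e+1))
            (by
              rw [pvU_nil]
              have h := hlink'
              rwa [pvU_full nums e (done ++ [u]) hfull'] at h)
            hl1len hr1len
            (by
              intro z
              rw [pvDisc_nil]
              simp only [List.not_mem_nil, or_false]
              rw [hco' z, hdfull]
              exact pvContains_shift nums e z)
            (by
              intro z hz
              have h := hvd' z (by rw [hdfull]; exact hz)
              push_cast
              omega)
            (by
              intro z hz
              rw [pvDisc_nil] at hz
              simp at hz)
            (by
              rw [if_pos rfl]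
              push_cast
              exact (max_eq_left (by omega)).symm)
            (by
              have h1 := pvStep_rem_length nums (pvSurv nums (e+1))
              have hsv : pvSurv nums (e+1+1) = pvStep nums (pvSurv nums (e+1)) := rfl
              have hfixeq : pvFix nums (pvSurv nums (e+1+1)) = pvFix nums (pvSurv nums (e+1)) := by
                rw [hsv]
                exact pvFix_step nums (pvSurv nums (e+1))
              have hfle : (pvFix nums (pvSurv nums (e+1))).length
                  ≤ (pvStep nums (pvSurv nums (e+1))).length := by
                rw [← pvFix_step nums (pvSurv nums (e+1))]
                exact pvFix_length_le nums (pvStep nums (pvSurv nums (e+1)))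
              simp only [List.length_cons, List.length_nil] at hfuel
              rw [hfixeq, hsv]
              omega)
          rw [pvDisc_nil, List.append_nil] at hres
          rw [List.nil_append, ← hdisc', hdfull, hres]
          have hrne : pvRem nums (pvSurv nums e) ≠ [] := by
            rw [hfull']
            simp
          have := pvRoundsStep nums e hrne
          push_cast at this ⊢
          omega
        · -- still inside round e+1's processing
          have hres := ih e (done ++ [u]) todo' ((if pvSc (nums.length : Int) (pvU nums e done) u < (nums.length : Int) then PySem.List.pySetD l (pvSc (nums.length : Int) (pvU nums e done) u) (pvPd (pvU nums e done) u) else l)) (PySem.List.pySetD r (pvPd (pvU nums e done) u) (pvSc (nums.length : Int) (pvU nums e done) u)) (dist.insert (pvSc (nums.length : Int) (pvU nums e done) u) ((e : Int) + 1 + 1)) ((e : Int) + 1)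
            hQ'assoc
            (by simp)
            (fun h => absurd h hT)
            hlink'
            hl1len hr1len
            hco' hvt' hvd'
            (by rw [if_neg (by simp)])
            hfuel'
          rw [List.append_assoc, ← hdisc']
          exact hres
      · -- no discovery at u
        rw [if_neg hcond]
        have hnone : (pvRem nums (pvSurv nums (e+1))).filter
            (fun y => decide (pvPd (pvSurv nums e) y = u)) = [] := by
          rw [List.filter_eq_nil_iff]
          intro y hy
          simp only [decide_eq_true_eq]
          intro hpd
          have hyx : y = pvSc (nums.length : Int) (pvU nums e done) u := pvNoOther nums e done u todo' hQ y hy hpd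
          subst hyx
          exact hcond (hiff.mpr ⟨hy, hpd⟩)
        have hdisc' : pvDisc nums e (done ++ [u]) = pvDisc nums e done := by
          rw [pvDiscSnoc nums e done u todo' hQ, hnone, List.append_nil]
        have hco' : ∀ z : Int, (dist.contains z = true) ↔
            ((0 ≤ z ∧ z < (nums.length : Int) ∧ z ∉ pvSurv nums (e+1)) ∨
              z ∈ pvDisc nums e (done ++ [u])) := by
          intro z
          rw [hdisc']
          exact hco z
        have hvt' : ∀ z ∈ todo', dist.getD z 0 = (e : Int) + 1 := fun z hz =>
          hvt z (List.mem_cons_of_mem _ hz)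
        have hvd' : ∀ z ∈ pvDisc nums e (done ++ [u]), dist.getD z 0 = (e : Int) + 2 := by
          intro z hz
          rw [hdisc'] at hz
          exact hvd z hz
        by_cases hT : todo' = []
        · subst hT
          have hfull' : pvRem nums (pvSurv nums e) = done ++ [u] := by simpa using hQ
          have hdfull : pvDisc nums e (done ++ [u]) = pvRem nums (pvSurv nums (e+1)) :=
            pvDisc_full nums e _ hfull'
          by_cases hD : pvDisc nums e done = []
          · -- nothing left at all: the loop ends here
            rw [hD]
            show loopA nums f ((if pvSc (nums.length : Int) (pvU nums e done) u < (nums.length : Int) then PySem.List.pySetD l (pvSc (nums.length : Int) (pvU nums e done) u) (pvPd (pvU nums e done) u) else l)) (PySem.List.pySetD r (pvPd (pvU nums e done) u) (pvSc (nums.length : Int) (pvU nums e done) u)) [] dist ((e:Int)+1) = _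
            rw [pvLoopA_nil]
            exact pvTerminal nums e (done ++ [u]) hfull' (by simp) (by rw [hdisc', hD])
          · -- round e+1 is fully discovered: reinterpret the state
            have hremeq : pvRem nums (pvSurv nums (e+1)) = pvDisc nums e done := by
              rw [← hdfull, hdisc']
            have hremne : pvRem nums (pvSurv nums (e+1)) ≠ [] := by
              rw [hremeq]
              exact hD
            have hres := ih (e+1) [] (pvRem nums (pvSurv nums (e+1))) ((if pvSc (nums.length : Int) (pvU nums e done) u < (nums.length : Int) then PySem.List.pySetD l (pvSc (nums.length : Int) (pvU nums e done) u) (pvPd (pvU nums e done) u) else l)) (PySem.List.pySetD r (pvPd (pvU nums e done) u) (pvSc (nums.length : Int) (pvU nums e done) u)) dist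
              ((e : Int) + 1)
              (List.nil_append _).symm
              (by simpa using hremne)
              (fun _ => pvDisc_nil nums (e+1))
              (by
                rw [pvU_nil]
                have h := hlink'
                rwa [pvU_full nums e (done ++ [u]) hfull'] at h)
              hl1len hr1len
              (by
                intro z
                rw [pvDisc_nil]
                simp only [List.not_mem_nil, or_false]
                rw [hco' z, hdfull]
                exact pvContains_shift nums e z)
              (by
                intro z hz
                have h := hvd' z (by rw [hdfull]; exact hz)
                push_cast
                omega)
              (by
                intro z hz
                rw [pvDisc_nil] at hz
                simp at hz)
              (by
                rw [if_pos rfl]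
                push_cast
                exact (max_eq_left (by omega)).symm)
              (by
                have h1 := pvStep_rem_length nums (pvSurv nums (e+1))
                have hsv : pvSurv nums (e+1+1) = pvStep nums (pvSurv nums (e+1)) := rfl
                have hfixeq : pvFix nums (pvSurv nums (e+1+1)) = pvFix nums (pvSurv nums (e+1)) := by
                  rw [hsv]
                  exact pvFix_step nums (pvSurv nums (e+1))
                have hfle : (pvFix nums (pvSurv nums (e+1))).length
                    ≤ (pvStep nums (pvSurv nums (e+1))).length := by
                  rw [← pvFix_step nums (pvSurv nums (e+1))]
                  exact pvFix_length_le nums (pvStep nums (pvSurv nums (e+1)))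
                simp only [List.length_cons, List.length_nil] at hfuel
                rw [hfixeq, hsv]
                omega)
            rw [pvDisc_nil, List.append_nil] at hres
            rw [List.nil_append, hremeq.symm, hres]
            have hrne : pvRem nums (pvSurv nums e) ≠ [] := by
              rw [hfull']
              simp
            have := pvRoundsStep nums e hrne
            push_cast at this ⊢
            omega
        · have hres := ih e (done ++ [u]) todo' ((if pvSc (nums.length : Int) (pvU nums e done) u < (nums.length : Int) then PySem.List.pySetD l (pvSc (nums.length : Int) (pvU nums e done) u) (pvPd (pvU nums e done) u) else l)) (PySem.List.pySetD r (pvPd (pvU nums e done) u) (pvSc (nums.length : Int) (pvU nums e done) u)) dist ((e : Int) + 1)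
            hQ'assoc
            (by simp)
            (fun h => absurd h hT)
            hlink'
            hl1len hr1len
            hco' hvt' hvd'
            (by rw [if_neg (by simp)])
            hfuel'
          rw [← hdisc']
          exact hres

-- ---------- A-side wiring ----------

theorem pvRemGo_range (nums : List Int) (a b : Int) :
    pvRemGo nums a (PySem.List.pyRange (a+1) b 1)
      = (PySem.List.pyRange (a+1) b 1).filter
          (fun i => decide (PySem.List.pyGetD nums i 0 < PySem.List.pyGetD nums (i - 1) 0)) := by
  by_cases h : a + 1 < b
  · rw [PySem.List.pyRange_one_cons h]
    have hrec := pvRemGo_range nums (a+1) b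
    have hred : (a + 1) - 1 = a := by ring
    rw [List.filter_cons]
    by_cases hc : PySem.List.pyGetD nums (a+1) 0 < PySem.List.pyGetD nums ((a+1) - 1) 0
    · rw [if_pos (by simpa using hc)]
      rw [hred] at hc
      show pvRemGo nums a ((a+1) :: _) = _
      rw [pvRemGo, if_pos (by exact hc), hrec]
    · rw [if_neg (by simpa using hc)]
      rw [hred] at hc
      show pvRemGo nums a ((a+1) :: _) = _
      rw [pvRemGo, if_neg (by exact hc), hrec]
  · rw [PySem.List.pyRange_one_eq_nil (by omega)]
    rfl
termination_by (b - a).toNat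
decreasing_by omega

theorem pvRem_surv0 (nums : List Int) :
    pvRem nums (pvSurv nums 0)
      = (PySem.List.pyRange 1 (nums.length : Int) 1).filter
          (fun i => decide (PySem.List.pyGetD nums i 0 < PySem.List.pyGetD nums (i - 1) 0)) := by
  show pvRem nums (PySem.List.pyRange 0 (nums.length : Int) 1) = _
  by_cases h : (0:Int) < (nums.length : Int)
  · rw [PySem.List.pyRange_one_cons h]
    show pvRemGo nums 0 _ = _
    have := pvRemGo_range nums 0 (nums.length : Int)
    norm_num at this ⊢
    exact this
  · rw [PySem.List.pyRange_one_eq_nil (by omega), PySem.List.pyRange_one_eq_nil (by omega)]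
    rfl

theorem pvInit_fold (nums : List Int) (L : List Int) (q0 : List Int)
    (d0 : PySem.Dict Int Int) (a0 : Int) :
    L.foldl (fun st i =>
      if PySem.List.pyGetD nums i 0 < PySem.List.pyGetD nums (i - 1) 0 then
        (st.1 ++ [i], st.2.1.insert i 1, (1 : Int))
      else st) (q0, d0, a0)
    = (q0 ++ L.filter (fun i => decide (PySem.List.pyGetD nums i 0 < PySem.List.pyGetD nums (i - 1) 0)),
       L.foldl (fun d i => if PySem.List.pyGetD nums i 0 < PySem.List.pyGetD nums (i - 1) 0
         then d.insert i 1 else d) d0,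
       if L.filter (fun i => decide (PySem.List.pyGetD nums i 0 < PySem.List.pyGetD nums (i - 1) 0)) = []
         then a0 else 1) := by
  induction L generalizing q0 d0 a0 with
  | nil => simp
  | cons i t ih =>
    simp only [List.foldl_cons, List.filter_cons]
    by_cases hc : PySem.List.pyGetD nums i 0 < PySem.List.pyGetD nums (i - 1) 0
    · rw [if_pos hc, if_pos (by simpa using hc), ih]
      simp [hc]
    · rw [if_neg hc, if_neg (by simpa using hc), ih]
      simp [hc]

theorem pvDictFold_contains (nums : List Int) (L : List Int) (d0 : PySem.Dict Int Int) (x : Int) :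
    ((L.foldl (fun d i => if PySem.List.pyGetD nums i 0 < PySem.List.pyGetD nums (i - 1) 0
        then d.insert i 1 else d) d0).contains x = true)
    ↔ (d0.contains x = true ∨
        x ∈ L.filter (fun i => decide (PySem.List.pyGetD nums i 0 < PySem.List.pyGetD nums (i - 1) 0))) := by
  induction L generalizing d0 with
  | nil => simp
  | cons i t ih =>
    simp only [List.foldl_cons, List.filter_cons]
    by_cases hc : PySem.List.pyGetD nums i 0 < PySem.List.pyGetD nums (i - 1) 0
    · rw [if_pos hc, ih]
      rw [PySem.Dict.contains_insert]
      simp only [if_pos (by simpa using hc : decide (PySem.List.pyGetD nums i 0 < PySem.List.pyGetD nums (i - 1) 0) = true)]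
      constructor
      · rintro (h | h)
        · rcases Bool.or_eq_true_iff.mp h with h' | h'
          · right
            simp only [List.mem_cons]
            left
            simpa using h'
          · exact Or.inl h'
        · right
          exact List.mem_cons_of_mem _ h
      · rintro (h | h)
        · exact Or.inl (by simp [h])
        · rcases List.mem_cons.mp h with h' | h'
          · exact Or.inl (by simp [h'])
          · exact Or.inr h'
    · rw [if_neg hc, ih]
      rw [if_neg (by simpa using hc : ¬ decide (PySem.List.pyGetD nums i 0 < PySem.List.pyGetD nums (i - 1) 0) = true)]

theorem pvDictFold_getD (nums : List Int) (L : List Int) (d0 : PySem.Dict Int Int) (x : Int) :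
    (L.foldl (fun d i => if PySem.List.pyGetD nums i 0 < PySem.List.pyGetD nums (i - 1) 0
        then d.insert i 1 else d) d0).getD x 0
    = if x ∈ L.filter (fun i => decide (PySem.List.pyGetD nums i 0 < PySem.List.pyGetD nums (i - 1) 0))
        then 1 else d0.getD x 0 := by
  induction L generalizing d0 with
  | nil => simp
  | cons i t ih =>
    simp only [List.foldl_cons, List.filter_cons]
    by_cases hc : PySem.List.pyGetD nums i 0 < PySem.List.pyGetD nums (i - 1) 0
    · rw [if_pos hc, ih]
      rw [if_pos (by simpa using hc : decide (PySem.List.pyGetD nums i 0 < PySem.List.pyGetD nums (i - 1) 0) = true)]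
      by_cases hx : x ∈ t.filter (fun i => decide (PySem.List.pyGetD nums i 0 < PySem.List.pyGetD nums (i - 1) 0))
      · rw [if_pos hx, if_pos (List.mem_cons_of_mem _ hx)]
      · rw [if_neg hx, PySem.Dict.getD_insert]
        by_cases hxi : x = i
        · rw [if_pos hxi, if_pos (by simp [hxi])]
        · rw [if_neg hxi, if_neg (by
            intro hmem
            rcases List.mem_cons.mp hmem with h' | h'
            · exact hxi h'
            · exact hx h')]
    · rw [if_neg hc, ih]
      rw [if_neg (by simpa using hc : ¬ decide (PySem.List.pyGetD nums i 0 < PySem.List.pyGetD nums (i - 1) 0) = true)]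

theorem pvLen_surv0 (nums : List Int) : (pvSurv nums 0).length = nums.length := by
  show (PySem.List.pyRange 0 (nums.length : Int) 1).length = nums.length
  rw [PySem.List.length_pyRange_one]
  omega

theorem pvLinks_init (nums : List Int) :
    pvLinks (nums.length : Int)
      ((PySem.List.pyRange 0 (nums.length : Int) 1).map (fun i => i - 1))
      ((PySem.List.pyRange 0 (nums.length : Int) 1).map (fun i => i + 1))
      (PySem.List.pyRange 0 (nums.length : Int) 1) := by
  intro v hv
  have hv' := PySem.List.mem_pyRange_one.mp hv
  constructor
  · rw [PySem.List.pyGetD_map_pyRange_of_nonneg _ _ _ _ hv'.1 hv'.2]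
    by_cases h0 : v = 0
    · subst h0
      have hneg : pvPd (PySem.List.pyRange 0 (nums.length : Int) 1) 0 = -1 := by
        apply pvPd_neg
        intro w hw
        have := PySem.List.mem_pyRange_one.mp hw
        omega
      rw [hneg]
      norm_num
    · symm
      apply pvPd_unique _ _ _ (by omega) (PySem.List.mem_pyRange_one.mpr (by omega)) (by omega)
      intro w hw hwv
      have := PySem.List.mem_pyRange_one.mp hw
      omega
  · rw [PySem.List.pyGetD_map_pyRange_of_nonneg _ _ _ _ hv'.1 hv'.2]
    by_cases h0 : v = (nums.length : Int) - 1
    · have htop : pvSc (nums.length : Int) (PySem.List.pyRange 0 (nums.length : Int) 1) v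
          = (nums.length : Int) := by
        apply pvSc_top
        intro w hw
        have := PySem.List.mem_pyRange_one.mp hw
        omega
      rw [htop]
      omega
    · symm
      apply pvSc_unique _ _ _ _ (by omega) (PySem.List.mem_pyRange_one.mpr (by omega)) (by omega)
      intro w hw hwv
      have := PySem.List.mem_pyRange_one.mp hw
      omega

theorem pvA_eq_roundsI (nums : List Int) :
    totalStepsBFS nums = (pvRoundsI nums (pvSurv nums 0) : Int) := by
  have hfold := pvInit_fold nums (PySem.List.pyRange 1 (nums.length : Int) 1) [] PySem.Dict.empty 0
  have hQ := pvRem_surv0 nums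
  simp only [totalStepsBFS, initA]
  rw [hfold]
  simp only [List.nil_append]
  by_cases hQe : (PySem.List.pyRange 1 (nums.length : Int) 1).filter
      (fun i => decide (PySem.List.pyGetD nums i 0 < PySem.List.pyGetD nums (i - 1) 0)) = []
  · rw [hQe, pvLoopA_nil, if_pos rfl, pvRoundsI, if_pos (hQ.trans hQe)]
    simp
  · rw [if_neg hQe]
    have hmain := pvMain nums (nums.length + 1) 0 []
      ((PySem.List.pyRange 1 (nums.length : Int) 1).filter
        (fun i => decide (PySem.List.pyGetD nums i 0 < PySem.List.pyGetD nums (i - 1) 0)))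
      ((PySem.List.pyRange 0 (nums.length : Int) 1).map (fun i => i - 1))
      ((PySem.List.pyRange 0 (nums.length : Int) 1).map (fun i => i + 1))
      ((PySem.List.pyRange 1 (nums.length : Int) 1).foldl
        (fun d i => if PySem.List.pyGetD nums i 0 < PySem.List.pyGetD nums (i - 1) 0
          then d.insert i 1 else d) PySem.Dict.empty)
      1
      (by simpa using hQ)
      (by simpa using hQe)
      (fun h => absurd h hQe)
      (by rw [pvU_nil]; exact pvLinks_init nums)
      (by rw [List.length_map, PySem.List.length_pyRange_one]; omega)
      (by rw [List.length_map, PySem.List.length_pyRange_one]; omega)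
      (by
        intro x
        rw [pvDictFold_contains, pvDisc_nil]
        have hsn := pvSurv_SN nums 0
        constructor
        · rintro (h | h)
          · simp at h
          · left
            rw [← hQ] at h
            have h' := (pvRem_iff_not_step nums _ _ hsn x).mp h
            have hb := PySem.List.mem_pyRange_one.mp h'.1
            exact ⟨hb.1, hb.2, h'.2⟩
        · rintro (⟨h1, h2, h3⟩ | h)
          · right
            rw [← hQ]
            rw [pvRem_iff_not_step nums _ _ hsn]
            exact ⟨PySem.List.mem_pyRange_one.mpr ⟨h1, h2⟩, h3⟩
          · simp at h)
      (by
        intro x hx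
        rw [pvDictFold_getD, if_pos hx]
        simp)
      (by
        intro x hx
        rw [pvDisc_nil] at hx
        simp at hx)
      (by simp)
      (by
        have h1 : (pvSurv nums 1).length + (pvRem nums (pvSurv nums 0)).length
            = (pvSurv nums 0).length := pvStep_rem_length nums (pvSurv nums 0)
        have h2 := pvLen_surv0 nums
        rw [hQ] at h1
        have h3 : pvSurv nums (0+1) = pvSurv nums 1 := rfl
        have h4 := pvFix_length_le nums (pvSurv nums 1)
        rw [h3]
        omega)
    rw [pvDisc_nil, List.append_nil] at hmain
    rw [hmain]
    simp

-- ---------- B-side wiring ----------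

theorem pvComp_eq_keepGoV (cur : List Int) (j : Nat) (hj1 : 1 ≤ j) (hj2 : j ≤ cur.length) :
    ((PySem.List.pyRange (j:Int) (cur.length:Int) 1).filter
        (fun i => decide (PySem.List.pyGetD cur (i-1) 0 ≤ PySem.List.pyGetD cur i 0))).map
      (fun i => PySem.List.pyGetD cur i 0)
    = pvKeepGoV (PySem.List.pyGetD cur ((j:Int)-1) 0) (cur.drop j) := by
  by_cases hlt : j < cur.length
  · rw [PySem.List.pyRange_one_cons (by exact_mod_cast hlt)]
    have hdrop : cur.drop j = cur[j] :: cur.drop (j+1) := List.drop_eq_getElem_cons hlt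
    have hget : PySem.List.pyGetD cur (j:Int) 0 = cur[j] :=
      PySem.List.pyGetD_ofNat cur j 0 hlt
    have hrec := pvComp_eq_keepGoV cur (j+1) (by omega) (by omega)
    have hcast : ((j:Int) + 1) = ((j+1 : Nat) : Int) := by push_cast; ring
    have hcast2 : ((j+1 : Nat) : Int) - 1 = (j : Int) := by push_cast; ring
    rw [List.filter_cons]
    by_cases hc : PySem.List.pyGetD cur ((j:Int)-1) 0 ≤ PySem.List.pyGetD cur (j:Int) 0
    · rw [if_pos (by simpa using hc)]
      rw [List.map_cons, hdrop, pvKeepGoV, if_neg (by rw [hget] at hc; omega), hget, hcast,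
        hrec, hcast2, hget]
    · rw [if_neg (by simpa using hc)]
      rw [hdrop, pvKeepGoV, if_pos (by rw [hget] at hc; omega), hcast, hrec, hcast2, hget]
  · have hj : j = cur.length := by omega
    subst hj
    rw [PySem.List.pyRange_one_eq_nil (by omega)]
    rw [List.drop_length]
    rfl
termination_by cur.length - j

theorem pvBStep_eq_stepV (cur : List Int) : bStep cur = pvStepV cur := by
  unfold bStep
  rw [PySem.List.slice_to cur (by norm_num : (0:Int) ≤ 1)]
  cases cur with
  | nil =>
    rw [PySem.List.pyRange_one_eq_nil (by simp)]
    rfl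
  | cons h t =>
    have := pvComp_eq_keepGoV (h :: t) 1 (le_refl _) (by simp)
    simp only [Nat.cast_one] at this
    rw [this]
    have hget : PySem.List.pyGetD (h :: t) ((1:Int) - 1) 0 = h := by
      norm_num
    rw [hget]
    rfl

theorem pvRemV_nil_iff (cur : List Int) :
    pvRemV cur = [] ↔ (pvStepV cur).length = cur.length := by
  have h := pvStepV_remV_length cur
  constructor
  · intro hc
    rw [hc] at h
    simpa using h
  · intro hc
    have : (pvRemV cur).length = 0 := by omega
    simpa using this

theorem pvBLoop_eq (steps : Int) (cur : List Int) :
    bLoop steps cur = steps + (pvRoundsV cur : Int) := by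
  rw [bLoop]
  simp only [pvBStep_eq_stepV]
  by_cases h : (pvStepV cur).length = cur.length
  · rw [if_pos h]
    have : pvRemV cur = [] := (pvRemV_nil_iff cur).mpr h
    rw [pvRoundsV, if_pos this]
    simp
  · rw [if_neg h]
    have hne : pvRemV cur ≠ [] := fun hc => h ((pvRemV_nil_iff cur).mp hc)
    have hrec := pvBLoop_eq (steps + 1) (pvStepV cur)
    have hrounds : pvRoundsV cur = 1 + pvRoundsV (pvStepV cur) := by
      conv_lhs => rw [pvRoundsV]
      rw [if_neg hne]
    rw [hrec, hrounds]
    push_cast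
    ring
termination_by cur.length
decreasing_by
  have h1 := pvStepV_remV_length cur
  have h2 : (pvRemV cur).length ≠ 0 := by simpa using hne
  omega

theorem pvKeepGoV_map (nums : List Int) (p : Int) (t : List Int) :
    pvKeepGoV (pvVal nums p) (t.map (pvVal nums)) = (pvKeepGo nums p t).map (pvVal nums) := by
  induction t generalizing p with
  | nil => rfl
  | cons x t ih =>
    simp only [List.map_cons, pvKeepGoV, pvKeepGo]
    by_cases h : pvVal nums x < pvVal nums p
    · rw [if_pos h, if_pos h, ih x]
    · rw [if_neg h, if_neg h, List.map_cons, ih x]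

theorem pvRemGoV_map (nums : List Int) (p : Int) (t : List Int) :
    pvRemGoV (pvVal nums p) (t.map (pvVal nums)) = (pvRemGo nums p t).map (pvVal nums) := by
  induction t generalizing p with
  | nil => rfl
  | cons x t ih =>
    simp only [List.map_cons, pvRemGoV, pvRemGo]
    by_cases h : pvVal nums x < pvVal nums p
    · rw [if_pos h, if_pos h, List.map_cons, ih x]
    · rw [if_neg h, if_neg h, ih x]

theorem pvStepV_map (nums : List Int) (s : List Int) :
    pvStepV (s.map (pvVal nums)) = (pvStep nums s).map (pvVal nums) := by
  cases s with
  | nil => rfl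
  | cons h t =>
    simp only [List.map_cons, pvStepV, pvStep]
    rw [pvKeepGoV_map]

theorem pvRemV_map (nums : List Int) (s : List Int) :
    pvRemV (s.map (pvVal nums)) = (pvRem nums s).map (pvVal nums) := by
  cases s with
  | nil => rfl
  | cons h t =>
    simp only [List.map_cons, pvRemV, pvRem]
    rw [pvRemGoV_map]

theorem pvRoundsV_map (nums : List Int) (s : List Int) :
    pvRoundsV (s.map (pvVal nums)) = pvRoundsI nums s := by
  rw [pvRoundsV, pvRoundsI, pvRemV_map]
  by_cases h : pvRem nums s = []
  · rw [if_pos (by simp [h]), if_pos h]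
  · rw [if_neg (by simp [h]), if_neg h]
    have hrec := pvRoundsV_map nums (pvStep nums s)
    rw [pvStepV_map, hrec]
termination_by s.length
decreasing_by
  have h1 := pvStep_rem_length nums s
  have h2 : (pvRem nums s).length ≠ 0 := by simpa using h
  omega

theorem pvB_eq_roundsI (nums : List Int) :
    totalStepsBFS_alt nums = (pvRoundsI nums (pvSurv nums 0) : Int) := by
  have hmap : (pvSurv nums 0).map (pvVal nums) = nums := by
    show (PySem.List.pyRange 0 (nums.length : Int) 1).map (fun i => PySem.List.pyGetD nums i 0) = nums
    exact PySem.List.map_pyGetD_pyRange_zero nums 0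
  unfold totalStepsBFS_alt
  rw [pvBLoop_eq, ← pvRoundsV_map nums (pvSurv nums 0), hmap]
  omega

-- ===== VERDICT (by name: the statement is the Claim_ definition above) =====
theorem totalStepsBFS_spec : Claim_equal_totalStepsBFS := by
  intro nums _hdom
  unfold Spec_totalStepsBFS
  rw [pvA_eq_roundsI, pvB_eq_roundsI]
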